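-- pv_equiv track=rewrite | github.com/WACoggins1/Genome-Reconstruction-GNN | data_processing.py | compress_unitigs
-- ===== SOURCE A (Python) =====
-- from collections import defaultdict
--
-- def compress_unitigs(edges):
--     """
--     Collapse maximal non-branching chains into unitigs.
--     Returns comp_id (orig_node_idx→unitig_id) and list of unitig edges.
--     """
--     in_nb, out_nb = defaultdict(list), defaultdict(list)
--     for u, v in edges:
--         out_nb[u].append(v)
--         in_nb[v].append(u)
--
--     comp_id, next_id = {}, 0
--     for node in set(in_nb) | set(out_nb):
--         if node in comp_id:
--             continue
--         u = node
--         # walk back to chain start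
--         while len(in_nb[u]) == 1 and len(out_nb[in_nb[u][0]]) == 1:
--             u = in_nb[u][0]
--         # walk forward and assign unitig
--         comp_id[u] = next_id
--         v = u
--         while len(out_nb[v]) == 1 and len(in_nb[out_nb[v][0]]) == 1:
--             v = out_nb[v][0]
--             comp_id[v] = next_id
--         next_id += 1
--
--     # build unitig edge set
--     unitig_edges = set()
--     for u, v in edges:
--         cu, cv = comp_id[u], comp_id[v]
--         if cu != cv:
--             unitig_edges.add((cu, cv))
--
--     return [comp_id[i] for i in range(len(comp_id))], list(unitig_edges)
-- ===== SOURCE B (Python) =====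
-- def compress_unitigs(edges):
--     """
--     Collapse maximal non-branching chains into unitigs.
--     Returns comp_id (orig_node_idx->unitig_id) and list of unitig edges.
--     Union-find re-implementation: union the endpoints of every edge (u, v) with
--     out-degree(u) == 1 and in-degree(v) == 1 (exactly the collapsible edges), then
--     number the classes by their first-seen member so ids match the walk version.
--     """
--     in_nb, out_nb = {}, {}
--     for u, v in edges:
--         out_nb.setdefault(u, []).append(v)
--         in_nb.setdefault(v, []).append(u)
--
--     nodes = set(in_nb) | set(out_nb)
--     parent = {x: x for x in nodes}
--
--     def find(x):
--         while parent[x] != x: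
--             x = parent[x]
--         return x
--
--     for u, v in edges:
--         if len(out_nb[u]) == 1 and len(in_nb[v]) == 1:
--             ru, rv = find(u), find(v)
--             if ru != rv:
--                 parent[ru] = rv
--
--     comp_id, roots, next_id = {}, {}, 0
--     for node in nodes:
--         r = find(node)
--         if r in roots:
--             comp_id[node] = roots[r]
--         else:
--             comp_id[node] = next_id
--             roots[r] = next_id
--             next_id += 1
--
--     unitig_edges = set()
--     for u, v in edges:
--         cu, cv = comp_id[u], comp_id[v]
--         if cu != cv:
--             unitig_edges.add((cu, cv))
--
--     return [comp_id[i] for i in range(len(comp_id))], list(unitig_edges)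
-- ===== Notes on version B (the rewrite author's own statement) =====
-- stated objective: alternative
-- what changed: The per-node backward-then-forward chain walks with on-the-fly numbering are replaced by a union-find: every collapsible edge (out-degree(u)=1, in-degree(v)=1) unions its endpoints, and classes are then numbered by their first-seen member in the same node order.
import Mathlib
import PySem

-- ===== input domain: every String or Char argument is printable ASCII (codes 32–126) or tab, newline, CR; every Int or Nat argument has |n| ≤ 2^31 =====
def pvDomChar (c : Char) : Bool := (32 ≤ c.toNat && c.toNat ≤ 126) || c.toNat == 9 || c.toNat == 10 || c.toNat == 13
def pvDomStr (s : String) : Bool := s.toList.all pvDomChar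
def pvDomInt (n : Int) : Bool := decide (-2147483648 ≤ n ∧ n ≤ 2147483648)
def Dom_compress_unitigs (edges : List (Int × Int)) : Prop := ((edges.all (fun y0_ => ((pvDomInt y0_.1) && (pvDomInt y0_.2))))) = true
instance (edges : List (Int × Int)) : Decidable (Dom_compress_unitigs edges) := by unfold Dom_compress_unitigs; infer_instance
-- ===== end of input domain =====

-- B replaces A's backward/forward chain walks by a union-find over the collapsible edges (same
-- return value; neither program's argument is mutated). Python iterates `set(in_nb) | set(out_nb)`
-- and `list(unitig_edges)` in hash order: for the node set Pre_ forces {0..k-1}, on which CPython's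
-- iteration is ascending (ported as sorted); for the unitig-edge set both ports reproduce
-- CPython's hash-table order with the pvSet* helpers below.

-- ===== PORT A =====
-- CPython's `set` of int pairs, ported step for step from CPython 3.11 setobject.c /
-- tupleobject.c (open addressing, LINEAR_PROBES = 9, xx-hash for tuples, growth x4 at 3/5
-- load): PySem does not model a set's iteration order, and `list(unitig_edges)` depends on
-- it, so the table layout is reproduced exactly (exact for tuples of ints; no deletions).
def pvU64 (h : Int) : Nat := (h % (18446744073709551616 : Int)).toNat

def pvHashInt (n : Int) : Int :=
  let M : Int := 2305843009213693951
  let h : Int := if 0 ≤ n then n % M else -((-n) % M)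
  if h = -1 then -2 else h

def pvRotl31 (x : Nat) : Nat :=
  ((x <<< 31) ||| (x >>> 33)) % 18446744073709551616

def pvHashPair (p : Int × Int) : Int :=
  let x1 : Nat := 11400714785074694791
  let x2 : Nat := 14029467366897019727
  let x5 : Nat := 2870177450012600261
  let acc0 := x5
  let acc1 := (pvRotl31 ((acc0 + pvU64 (pvHashInt p.1) * x2) % 18446744073709551616)
      * x1) % 18446744073709551616
  let acc2 := (pvRotl31 ((acc1 + pvU64 (pvHashInt p.2) * x2) % 18446744073709551616)
      * x1) % 18446744073709551616
  let acc3 := (acc2 + (2 ^^^ (x5 ^^^ 3527539))) % 18446744073709551616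
  let acc4 := if acc3 = 18446744073709551615 then 1546275796 else acc3
  let s : Int := if acc4 < 9223372036854775808 then (acc4 : Int)
    else (acc4 : Int) - 18446744073709551616
  if s = -1 then -2 else s

-- scan `cnt` consecutive slots from `i`: first empty slot, or `some none` when the key sits there
def pvScan (table : List (Option (Int × (Int × Int)))) (h : Int) (key : Int × Int) :
    Nat → Nat → Option (Option Nat)
  | _, 0 => none
  | i, c + 1 =>
      match table.getD i none with
      | none => some (some i)
      | some (h', k') =>
          if h' = h ∧ k' = key then some none else pvScan table h key (i + 1) c

def pvAddLoop (table : List (Option (Int × (Int × Int)))) (mask : Nat) (h : Int)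
    (key : Int × Int) : Nat → Nat → Nat → List (Option (Int × (Int × Int))) × Bool
  | 0, _, _ => (table, false)
  | f + 1, i, perturb =>
      match pvScan table h key i ((if i + 9 ≤ mask then 9 else 0) + 1) with
      | some (some k) => (table.set k (some (h, key)), true)
      | some none => (table, false)
      | none =>
          pvAddLoop table mask h key f ((i * 5 + 1 + (perturb >>> 5)) &&& mask) (perturb >>> 5)

-- first empty slot among the `c` slots from `i` (resize path)
def pvCleanScan (table : List (Option (Int × (Int × Int)))) : Nat → Nat → Option Nat
  | _, 0 => none
  | i, c + 1 => if (table.getD i none).isNone then some i else pvCleanScan table (i + 1) c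

def pvCleanLoop (mask : Nat) (h : Int) (key : Int × Int) :
    List (Option (Int × (Int × Int))) → Nat → Nat → Nat → List (Option (Int × (Int × Int)))
  | table, 0, _, _ => table
  | table, f + 1, i, perturb =>
      if (table.getD i none).isNone then table.set i (some (h, key))
      else
        match (if i + 9 ≤ mask then pvCleanScan table (i + 1) 9 else none) with
        | some k => table.set k (some (h, key))
        | none =>
            pvCleanLoop mask h key table f ((i * 5 + 1 + (perturb >>> 5)) &&& mask)
              (perturb >>> 5)

def pvNewSize (minused : Nat) : Nat → Nat → Nat
  | 0, s => s
  | f + 1, s => if s ≤ minused then pvNewSize minused f (2 * s) else s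

def pvSetResize (table : List (Option (Int × (Int × Int)))) (used : Nat) :
    List (Option (Int × (Int × Int))) :=
  let minused := used * (if 50000 < used then 2 else 4)
  let newsize := pvNewSize minused 64 8
  table.foldl
    (fun t e =>
      match e with
      | none => t
      | some (h, k) => pvCleanLoop (newsize - 1) h k t (newsize + 64) (pvU64 h &&& (newsize - 1))
          (pvU64 h))
    (List.replicate newsize none)

def pvSetAdd (s : List (Option (Int × (Int × Int))) × Nat) (key : Int × Int) :
    List (Option (Int × (Int × Int))) × Nat :=
  let h := pvHashPair key
  let mask := s.1.length - 1
  let r := pvAddLoop s.1 mask h key (s.1.length + 64) (pvU64 h &&& mask) (pvU64 h)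
  if r.2 then
    if 3 * mask ≤ 5 * (s.2 + 1) then (pvSetResize r.1 (s.2 + 1), s.2 + 1)
    else (r.1, s.2 + 1)
  else (r.1, s.2)

def pvSetEmpty : List (Option (Int × (Int × Int))) × Nat := (List.replicate 8 none, 0)

def pvSetList (s : List (Option (Int × (Int × Int))) × Nat) : List (Int × Int) :=
  s.1.filterMap (fun e => e.map (·.2))

-- in_nb/out_nb: defaultdict(list) append = Dict.modify with default []
def pvA_nbs (edges : List (Int × Int)) :
    PySem.Dict Int (List Int) × PySem.Dict Int (List Int) :=
  edges.foldl (fun d uv =>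
    (d.1.modify uv.2 [] (· ++ [uv.1]), d.2.modify uv.1 [] (· ++ [uv.2])))
    (PySem.Dict.empty, PySem.Dict.empty)

-- `for node in set(in_nb) | set(out_nb)`: ascending under Pre_ (see header), ported as sorted
def pvA_nodes (edges : List (Int × Int)) : List Int :=
  PySem.List.sorted
    (PySem.Set.union (PySem.Set.ofList (pvA_nbs edges).1.keys) (pvA_nbs edges).2.keys)
    (fun x => x) false

-- `while len(in_nb[u]) == 1 and len(out_nb[in_nb[u][0]]) == 1: u = in_nb[u][0]`
-- (fuel-bounded; under Pre_ the walk ends before #nodes+1 iterations)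
def pvA_back (inb onb : PySem.Dict Int (List Int)) : Nat → Int → Int
  | 0, u => u
  | fuel + 1, u =>
      if (inb.getD u []).length = 1 ∧ (onb.getD ((inb.getD u []).headD 0) []).length = 1 then
        pvA_back inb onb fuel ((inb.getD u []).headD 0)
      else u

-- `while len(out_nb[v]) == 1 and len(in_nb[out_nb[v][0]]) == 1: v = out_nb[v][0]; comp_id[v] = next_id`
def pvA_fwd (inb onb : PySem.Dict Int (List Int)) :
    Nat → Int → Int → PySem.Dict Int Int → PySem.Dict Int Int
  | 0, _, _, cid => cid
  | fuel + 1, v, nid, cid =>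
      if (onb.getD v []).length = 1 ∧ (inb.getD ((onb.getD v []).headD 0) []).length = 1 then
        pvA_fwd inb onb fuel ((onb.getD v []).headD 0) nid
          (cid.insert ((onb.getD v []).headD 0) nid)
      else cid

def pvA_assign (edges : List (Int × Int)) : PySem.Dict Int Int × Int :=
  (pvA_nodes edges).foldl
    (fun s node =>
      if s.1.contains node then s
      else
        (pvA_fwd (pvA_nbs edges).1 (pvA_nbs edges).2 ((pvA_nodes edges).length + 1)
            (pvA_back (pvA_nbs edges).1 (pvA_nbs edges).2 ((pvA_nodes edges).length + 1) node)
            s.2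
            (s.1.insert
              (pvA_back (pvA_nbs edges).1 (pvA_nbs edges).2 ((pvA_nodes edges).length + 1) node)
              s.2),
          s.2 + 1))
    (PySem.Dict.empty, 0)

def compress_unitigs (edges : List (Int × Int)) : List Int × (List (Int × Int)) :=
  let comp := (pvA_assign edges).1
  -- `[comp_id[i] for i in range(len(comp_id))]`; comp_id[i] raises KeyError on a missing key,
  -- excluded by Pre_ (getD is exact there)
  let ids := (PySem.List.pyRange 0 (comp.size : Int) 1).map (fun i => comp.getD i 0)
  -- `unitig_edges` set, in CPython's table order (see header)
  let ue := edges.foldl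
    (fun s uv =>
      if comp.getD uv.1 0 ≠ comp.getD uv.2 0 then
        pvSetAdd s (comp.getD uv.1 0, comp.getD uv.2 0)
      else s)
    pvSetEmpty
  (ids, pvSetList ue)

-- ===== PORT B =====
-- same first loop: dict.setdefault(key, []).append(x) = Dict.modify with default []
def pvB_nbs (edges : List (Int × Int)) :
    PySem.Dict Int (List Int) × PySem.Dict Int (List Int) :=
  edges.foldl (fun d uv =>
    (d.1.modify uv.2 [] (· ++ [uv.1]), d.2.modify uv.1 [] (· ++ [uv.2])))
    (PySem.Dict.empty, PySem.Dict.empty)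

def pvB_nodes (edges : List (Int × Int)) : List Int :=
  PySem.List.sorted
    (PySem.Set.union (PySem.Set.ofList (pvB_nbs edges).1.keys) (pvB_nbs edges).2.keys)
    (fun x => x) false

-- `while parent[x] != x: x = parent[x]` (fuel-bounded; parent is a forest, so under Pre_
-- the chain reaches its root before #nodes+1 iterations)
def pvB_find (par : PySem.Dict Int Int) : Nat → Int → Int
  | 0, x => x
  | fuel + 1, x => if par.getD x x = x then x else pvB_find par fuel (par.getD x x)

-- `parent = {x: x for x in nodes}`, then one union per collapsible edge
def pvB_parent (edges : List (Int × Int)) : PySem.Dict Int Int :=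
  edges.foldl
    (fun par uv =>
      if ((pvB_nbs edges).2.getD uv.1 []).length = 1 ∧
          ((pvB_nbs edges).1.getD uv.2 []).length = 1 then
        if pvB_find par ((pvB_nodes edges).length + 1) uv.1 ≠
            pvB_find par ((pvB_nodes edges).length + 1) uv.2 then
          par.insert (pvB_find par ((pvB_nodes edges).length + 1) uv.1)
            (pvB_find par ((pvB_nodes edges).length + 1) uv.2)
        else par
      else par)
    ((pvB_nodes edges).foldl (fun d x => d.insert x x) PySem.Dict.empty)

-- number the classes by first-seen member: comp_id[node] = roots.setdefault-style lookup of find(node)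
def pvB_ids (edges : List (Int × Int)) : PySem.Dict Int Int :=
  ((pvB_nodes edges).foldl
    (fun s node =>
      match s.2.1.get? (pvB_find (pvB_parent edges) ((pvB_nodes edges).length + 1) node) with
      | some i => (s.1.insert node i, s.2)
      | none =>
          (s.1.insert node s.2.2,
           (s.2.1.insert (pvB_find (pvB_parent edges) ((pvB_nodes edges).length + 1) node) s.2.2,
            s.2.2 + 1)))
    (PySem.Dict.empty, (PySem.Dict.empty, 0))).1

def compress_unitigs_alt (edges : List (Int × Int)) : List Int × (List (Int × Int)) :=
  let comp := pvB_ids edges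
  let ids := (PySem.List.pyRange 0 (comp.size : Int) 1).map (fun i => comp.getD i 0)
  let ue := edges.foldl
    (fun s uv =>
      if comp.getD uv.1 0 ≠ comp.getD uv.2 0 then
        pvSetAdd s (comp.getD uv.1 0, comp.getD uv.2 0)
      else s)
    pvSetEmpty
  (ids, pvSetList ue)

-- ===== PRECONDITION & SPEC =====
-- in-neighbour and out-neighbour lists of a node, straight from the edge list
def pvSin (edges : List (Int × Int)) (v : Int) : List Int :=
  (edges.filter (fun e => e.2 == v)).map (·.1)
def pvSout (edges : List (Int × Int)) (u : Int) : List Int :=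
  (edges.filter (fun e => e.1 == u)).map (·.2)
-- the collapsible-predecessor step: u's unique in-neighbour p when indeg(u)=1 and outdeg(p)=1
def pvStep (edges : List (Int × Int)) (u : Int) : Option Int :=
  if (pvSin edges u).length = 1 ∧ (pvSout edges ((pvSin edges u).headD 0)).length = 1 then
    some ((pvSin edges u).headD 0)
  else none
-- the predecessor chain from u ends (reaches a node with no collapsible predecessor) within the fuel
def pvChainEnds (edges : List (Int × Int)) : Nat → Int → Bool
  | 0, u => (pvStep edges u).isNone
  | n + 1, u =>
      match pvStep edges u with
      | none => true
      | some p => pvChainEnds edges n p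
def pvNodes (edges : List (Int × Int)) : List Int :=
  PySem.Set.ofList (edges.map (·.2) ++ edges.map (·.1))

-- Pre_ excludes exactly the inputs on which A does not return: node labels other than
-- {0..k-1} (KeyError in A's final comprehension) and graphs whose collapsible-predecessor
-- relation has a cycle (A's backward walk loops forever).
def Pre_compress_unitigs (edges : List (Int × Int)) : Prop :=
  (∀ x ∈ pvNodes edges, 0 ≤ x ∧ x < ((pvNodes edges).length : Int)) ∧
  (∀ x ∈ pvNodes edges, pvChainEnds edges (pvNodes edges).length x = true)
instance (edges : List (Int × Int)) : Decidable (Pre_compress_unitigs edges) := by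
  unfold Pre_compress_unitigs; infer_instance

def pvWitness_compress_unitigs : (List (Int × Int)) := [(0, 1), (1, 2), (3, 2)]

def Spec_compress_unitigs (edges : List (Int × Int)) (out : List Int × (List (Int × Int))) : Prop :=
  out = compress_unitigs_alt edges
instance (edges : List (Int × Int)) (out : List Int × (List (Int × Int))) :
    Decidable (Spec_compress_unitigs edges out) := by unfold Spec_compress_unitigs; infer_instance

-- ===== CLAIM (what is proved, stated in full; the proofs are below) =====
def Claim_equal_compress_unitigs : Prop :=
  ∀ (edges : List (Int × Int)), Dom_compress_unitigs edges → Pre_compress_unitigs edges →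
    Spec_compress_unitigs edges (compress_unitigs edges)

-- ===== LEMMAS AND PROOFS =====

-- ---- Phase 1: the built dictionaries and the node list ----

theorem pv_nbs_fst (edges : List (Int × Int)) :
    (pvA_nbs edges).1 =
      edges.foldl (fun d uv => d.modify uv.2 [] (· ++ [uv.1])) PySem.Dict.empty :=
  congrArg Prod.fst
    (PySem.List.foldl_prod_mk
      (fun (d : PySem.Dict Int (List Int)) (uv : Int × Int) => d.modify uv.2 [] (· ++ [uv.1]))
      (fun (d : PySem.Dict Int (List Int)) (uv : Int × Int) => d.modify uv.1 [] (· ++ [uv.2]))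
      edges PySem.Dict.empty PySem.Dict.empty)

theorem pv_nbs_snd (edges : List (Int × Int)) :
    (pvA_nbs edges).2 =
      edges.foldl (fun d uv => d.modify uv.1 [] (· ++ [uv.2])) PySem.Dict.empty :=
  congrArg Prod.snd
    (PySem.List.foldl_prod_mk
      (fun (d : PySem.Dict Int (List Int)) (uv : Int × Int) => d.modify uv.2 [] (· ++ [uv.1]))
      (fun (d : PySem.Dict Int (List Int)) (uv : Int × Int) => d.modify uv.1 [] (· ++ [uv.2]))
      edges PySem.Dict.empty PySem.Dict.empty)

theorem pv_getD_in (edges : List (Int × Int)) (v : Int) :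
    (pvA_nbs edges).1.getD v [] = pvSin edges v := by
  rw [pv_nbs_fst]
  have h : edges.foldl (fun d uv => d.modify uv.2 [] (· ++ [uv.1])) PySem.Dict.empty
      = (edges.map Prod.swap).foldl (fun d p => d.modify p.1 [] (· ++ [p.2])) PySem.Dict.empty := by
    rw [List.foldl_map]; simp
  rw [h, PySem.Dict.getD_foldl_modify_append]
  simp [pvSin, List.filter_map, Function.comp_def]

theorem pv_getD_out (edges : List (Int × Int)) (u : Int) :
    (pvA_nbs edges).2.getD u [] = pvSout edges u := by
  rw [pv_nbs_snd, PySem.Dict.getD_foldl_modify_append]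
  simp [pvSout]

theorem pv_keys_in (edges : List (Int × Int)) :
    (pvA_nbs edges).1.keys = PySem.Set.ofList (edges.map (·.2)) := by
  rw [pv_nbs_fst]
  have h := PySem.Dict.keys_foldl_modify_key edges (fun uv => uv.2)
    ([] : List Int) (fun _ uv => (· ++ [uv.1])) PySem.Dict.empty
  simpa [PySem.Set.update_nil_left] using h

theorem pv_keys_out (edges : List (Int × Int)) :
    (pvA_nbs edges).2.keys = PySem.Set.ofList (edges.map (·.1)) := by
  rw [pv_nbs_snd]
  have h := PySem.Dict.keys_foldl_modify_key edges (fun uv => uv.1)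
    ([] : List Int) (fun _ uv => (· ++ [uv.2])) PySem.Dict.empty
  simpa [PySem.Set.update_nil_left] using h

theorem pv_mem_nodes (edges : List (Int × Int)) (x : Int) :
    x ∈ pvA_nodes edges ↔ x ∈ pvNodes edges := by
  unfold pvA_nodes pvNodes
  rw [PySem.List.mem_sorted, pv_keys_in, pv_keys_out, PySem.Set.ofList_ofList,
    PySem.Set.mem_union, PySem.Set.mem_ofList, PySem.Set.mem_ofList, PySem.Set.mem_ofList,
    List.mem_append]

theorem pv_nodes_nodup (edges : List (Int × Int)) : (pvA_nodes edges).Nodup := by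
  unfold pvA_nodes
  have h1 : (PySem.Set.union (PySem.Set.ofList (pvA_nbs edges).1.keys)
      (pvA_nbs edges).2.keys).Nodup :=
    PySem.Set.nodup_union _ _ (PySem.Set.nodup_ofList _)
  exact ((PySem.List.sorted_perm _ _ _).nodup_iff).mpr h1

-- ---- Phase 2: under Pre_ the node list is the ascending range 0..k-1 ----

def pvRng (edges : List (Int × Int)) : List Int :=
  (List.range (pvNodes edges).length).map (fun i : Nat => (i : Int))

theorem pv_rng_nodup (edges : List (Int × Int)) : (pvRng edges).Nodup := by
  unfold pvRng
  refine List.Nodup.map ?_ List.nodup_range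
  exact fun a b h => by exact_mod_cast h

theorem pv_mem_rng (edges : List (Int × Int)) (a : Int) :
    a ∈ pvRng edges ↔ 0 ≤ a ∧ a < ((pvNodes edges).length : Int) := by
  unfold pvRng
  constructor
  · intro h
    obtain ⟨i, hi, rfl⟩ := List.mem_map.mp h
    have hi' : i < (pvNodes edges).length := List.mem_range.mp hi
    omega
  · rintro ⟨h0, h1⟩
    refine List.mem_map.mpr ⟨a.toNat, List.mem_range.mpr ?_, ?_⟩ <;> omega

theorem pv_nodes_nodup' (edges : List (Int × Int)) : (pvNodes edges).Nodup :=
  PySem.Set.nodup_ofList _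

theorem pv_mem_nodes_of_bounds (edges : List (Int × Int))
    (pre1 : ∀ x ∈ pvNodes edges, 0 ≤ x ∧ x < ((pvNodes edges).length : Int))
    (a : Int) (h0 : 0 ≤ a) (h1 : a < ((pvNodes edges).length : Int)) :
    a ∈ pvNodes edges := by
  have hsub : (pvNodes edges).toFinset ⊆ Finset.Ico 0 ((pvNodes edges).length : Int) := by
    intro x hx
    rw [List.mem_toFinset] at hx
    rcases pre1 x hx with ⟨hx0, hx1⟩
    exact Finset.mem_Ico.mpr ⟨hx0, hx1⟩
  have hcard : (Finset.Ico (0 : Int) ((pvNodes edges).length : Int)).card ≤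
      (pvNodes edges).toFinset.card := by
    rw [Int.card_Ico, List.toFinset_card_of_nodup (pv_nodes_nodup' edges)]
    omega
  have heq := Finset.eq_of_subset_of_card_le hsub hcard
  have : a ∈ (pvNodes edges).toFinset := by
    rw [heq]; exact Finset.mem_Ico.mpr ⟨h0, h1⟩
  simpa using this

theorem pv_nodes_eq_rng (edges : List (Int × Int))
    (pre1 : ∀ x ∈ pvNodes edges, 0 ≤ x ∧ x < ((pvNodes edges).length : Int)) :
    pvA_nodes edges = pvRng edges := by
  unfold pvA_nodes
  apply PySem.List.sorted_eq_of_perm_of_pairwise_lt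
  · rw [List.perm_ext_iff_of_nodup (pv_rng_nodup edges)
      (by
        have := pv_nodes_nodup edges
        unfold pvA_nodes at this
        exact ((PySem.List.sorted_perm _ _ _).nodup_iff).mp this)]
    intro a
    rw [pv_mem_rng]
    have hmem : a ∈ (PySem.Set.union (PySem.Set.ofList (pvA_nbs edges).1.keys)
        (pvA_nbs edges).2.keys) ↔ a ∈ pvNodes edges := by
      have := pv_mem_nodes edges a
      unfold pvA_nodes at this
      rw [← this, PySem.List.mem_sorted]
    rw [hmem]
    constructor
    · rintro ⟨h0, h1⟩; exact pv_mem_nodes_of_bounds edges pre1 a h0 h1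
    · intro h; exact pre1 a h
  · unfold pvRng
    refine List.Pairwise.map _ ?_ List.pairwise_lt_range
    exact fun a b h => by exact_mod_cast h

theorem pv_nodes_len (edges : List (Int × Int))
    (pre1 : ∀ x ∈ pvNodes edges, 0 ≤ x ∧ x < ((pvNodes edges).length : Int)) :
    (pvA_nodes edges).length = (pvNodes edges).length := by
  rw [pv_nodes_eq_rng edges pre1]
  simp [pvRng]

-- ---- Phase 3: the collapsible-predecessor chain machinery ----

def pvRootF (edges : List (Int × Int)) : Nat → Int → Int
  | 0, u => u
  | f + 1, u =>
      match pvStep edges u with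
      | some p => pvRootF edges f p
      | none => u

def pvInvStep (edges : List (Int × Int)) (v : Int) : Option Int :=
  if (pvSout edges v).length = 1 ∧ (pvSin edges ((pvSout edges v).headD 0)).length = 1 then
    some ((pvSout edges v).headD 0)
  else none

def pvFwdL (edges : List (Int × Int)) : Nat → Int → List Int
  | 0, _ => []
  | f + 1, v =>
      match pvInvStep edges v with
      | some w => w :: pvFwdL edges f w
      | none => []

def pvSteps (edges : List (Int × Int)) : Nat → Int → Int → Prop
  | 0, x, r => x = r
  | n + 1, x, r => ∃ p, pvStep edges x = some p ∧ pvSteps edges n p r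

def pvRoot (edges : List (Int × Int)) (u : Int) : Int :=
  pvRootF edges ((pvNodes edges).length + 1) u

theorem pvA_back_eq (edges : List (Int × Int)) :
    ∀ (f : Nat) (u : Int),
      pvA_back (pvA_nbs edges).1 (pvA_nbs edges).2 f u = pvRootF edges f u := by
  intro f
  induction f with
  | zero => intro u; rfl
  | succ f ih =>
      intro u
      show (if _ then pvA_back _ _ f _ else u) = _
      rw [pv_getD_in, pv_getD_out]
      unfold pvRootF pvStep
      split_ifs with hC
      · exact ih _
      · rfl

theorem pv_list_len_one {l : List Int} (h : l.length = 1) : l = [l.headD 0] := by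
  cases l with
  | nil => simp at h
  | cons a t => cases t with
    | nil => rfl
    | cons b t' => simp at h

theorem pv_mem_sout (edges : List (Int × Int)) (v w : Int) :
    w ∈ pvSout edges v ↔ (v, w) ∈ edges := by
  unfold pvSout
  constructor
  · intro h
    obtain ⟨e, he, rfl⟩ := List.mem_map.mp h
    obtain ⟨he1, he2⟩ := List.mem_filter.mp he
    have : e.1 = v := by simpa using he2
    cases e; simp_all
  · intro h
    exact List.mem_map.mpr ⟨(v, w), List.mem_filter.mpr ⟨h, by simp⟩, rfl⟩

theorem pv_mem_sin (edges : List (Int × Int)) (u w : Int) :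
    u ∈ pvSin edges w ↔ (u, w) ∈ edges := by
  unfold pvSin
  constructor
  · intro h
    obtain ⟨e, he, rfl⟩ := List.mem_map.mp h
    obtain ⟨he1, he2⟩ := List.mem_filter.mp he
    have : e.2 = w := by simpa using he2
    cases e; simp_all
  · intro h
    exact List.mem_map.mpr ⟨(u, w), List.mem_filter.mpr ⟨h, by simp⟩, rfl⟩

theorem pv_step_some_iff (edges : List (Int × Int)) (w v : Int) :
    pvStep edges w = some v ↔ pvSin edges w = [v] ∧ (pvSout edges v).length = 1 := by
  unfold pvStep
  by_cases hC : (pvSin edges w).length = 1 ∧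
      (pvSout edges ((pvSin edges w).headD 0)).length = 1
  · rw [if_pos hC]
    constructor
    · intro h
      have hv : (pvSin edges w).headD 0 = v := by injection h
      refine ⟨hv ▸ pv_list_len_one hC.1, hv ▸ hC.2⟩
    · rintro ⟨h1, h2⟩
      rw [h1]; rfl
  · rw [if_neg hC]
    constructor
    · intro h; cases h
    · rintro ⟨h1, h2⟩
      exfalso
      apply hC
      have hh : (pvSin edges w).headD 0 = v := by rw [h1]; rfl
      exact ⟨by rw [h1]; rfl, by rw [hh]; exact h2⟩

theorem pv_inv_some_iff (edges : List (Int × Int)) (v w : Int) :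
    pvInvStep edges v = some w ↔ pvSout edges v = [w] ∧ (pvSin edges w).length = 1 := by
  unfold pvInvStep
  by_cases hC : (pvSout edges v).length = 1 ∧
      (pvSin edges ((pvSout edges v).headD 0)).length = 1
  · rw [if_pos hC]
    constructor
    · intro h
      have hv : (pvSout edges v).headD 0 = w := by injection h
      refine ⟨hv ▸ pv_list_len_one hC.1, hv ▸ hC.2⟩
    · rintro ⟨h1, h2⟩
      rw [h1]; rfl
  · rw [if_neg hC]
    constructor
    · intro h; cases h
    · rintro ⟨h1, h2⟩
      exfalso
      apply hC
      have hh : (pvSout edges v).headD 0 = w := by rw [h1]; rfl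
      exact ⟨by rw [h1]; rfl, by rw [hh]; exact h2⟩

theorem pv_step_inv (edges : List (Int × Int)) (w v : Int) :
    pvStep edges w = some v ↔ pvInvStep edges v = some w := by
  rw [pv_step_some_iff, pv_inv_some_iff]
  constructor
  · rintro ⟨h1, h2⟩
    have hvw : (v, w) ∈ edges := (pv_mem_sin edges v w).mp (by rw [h1]; exact List.mem_singleton.mpr rfl)
    have hw : w ∈ pvSout edges v := (pv_mem_sout edges v w).mpr hvw
    have hs : pvSout edges v = [(pvSout edges v).headD 0] := pv_list_len_one h2
    have : w = (pvSout edges v).headD 0 := by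
      rw [hs] at hw; simpa using hw
    refine ⟨by rw [hs, ← this], by simp [h1]⟩
  · rintro ⟨h1, h2⟩
    have hvw : (v, w) ∈ edges := (pv_mem_sout edges v w).mp (by rw [h1]; exact List.mem_singleton.mpr rfl)
    have hv : v ∈ pvSin edges w := (pv_mem_sin edges v w).mpr hvw
    have hs : pvSin edges w = [(pvSin edges w).headD 0] := pv_list_len_one h2
    have : v = (pvSin edges w).headD 0 := by
      rw [hs] at hv; simpa using hv
    refine ⟨by rw [hs, ← this], by simp [h1]⟩

-- ---- Phase 3b: chain-end fuel lemmas, determinism, roots ----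

theorem pvRootF_succ (edges : List (Int × Int)) (f : Nat) (u : Int) :
    pvRootF edges (f + 1) u =
      match pvStep edges u with
      | some p => pvRootF edges f p
      | none => u := rfl

theorem pvCE_succ_eq (edges : List (Int × Int)) (f : Nat) (u : Int) :
    pvChainEnds edges (f + 1) u =
      match pvStep edges u with
      | none => true
      | some p => pvChainEnds edges f p := rfl

theorem pv_ce_succ (edges : List (Int × Int)) :
    ∀ (f : Nat) (u : Int), pvChainEnds edges f u = true → pvChainEnds edges (f + 1) u = true := by
  intro f
  induction f with
  | zero =>
      intro u h
      unfold pvChainEnds at h ⊢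
      cases hs : pvStep edges u with
      | none => rfl
      | some p => rw [hs] at h; simp at h
  | succ f ih =>
      intro u h
      unfold pvChainEnds at h ⊢
      cases hs : pvStep edges u with
      | none => rfl
      | some p =>
          rw [hs] at h
          exact ih p h

theorem pv_ce_le (edges : List (Int × Int)) {f g : Nat} (hfg : f ≤ g) (u : Int)
    (h : pvChainEnds edges f u = true) : pvChainEnds edges g u = true := by
  induction g with
  | zero => rw [Nat.le_zero.mp hfg] at h; exact h
  | succ g ih =>
      rcases Nat.lt_or_ge f (g + 1) with hlt | hge
      · exact pv_ce_succ edges g u (ih (Nat.lt_succ_iff.mp hlt))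
      · rw [Nat.le_antisymm hfg hge] at h; exact h

theorem pv_ce_root (edges : List (Int × Int)) :
    ∀ (f : Nat) (u : Int), pvChainEnds edges f u = true →
      pvStep edges (pvRootF edges f u) = none ∧
        ∃ n, n ≤ f ∧ pvSteps edges n u (pvRootF edges f u) := by
  intro f
  induction f with
  | zero =>
      intro u h
      unfold pvChainEnds at h
      have h0 : pvRootF edges 0 u = u := rfl
      rw [h0]
      exact ⟨Option.isNone_iff_eq_none.mp h, 0, Nat.le_refl 0, rfl⟩
  | succ f ih =>
      intro u h
      rw [pvCE_succ_eq] at h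
      cases hs : pvStep edges u with
      | none =>
          rw [pvRootF_succ, hs]
          exact ⟨hs, 0, Nat.zero_le _, rfl⟩
      | some p =>
          rw [hs] at h
          obtain ⟨hnone, n, hn, hsteps⟩ := ih p h
          rw [pvRootF_succ, hs]
          exact ⟨hnone, n + 1, by omega, ⟨p, hs, hsteps⟩⟩

theorem pv_steps_det (edges : List (Int × Int)) :
    ∀ (n m : Nat) (u r r' : Int), pvSteps edges n u r → pvSteps edges m u r' →
      pvStep edges r = none → pvStep edges r' = none → r = r' := by
  intro n
  induction n with
  | zero =>
      intro m u r r' h1 h2 hr hr'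
      have h1' : u = r := h1
      subst h1'
      cases m with
      | zero => exact h2
      | succ m =>
          obtain ⟨p, hp, _⟩ := h2
          rw [hr] at hp; cases hp
  | succ n ih =>
      intro m u r r' h1 h2 hr hr'
      obtain ⟨p, hp, hsteps⟩ := h1
      cases m with
      | zero =>
          have h2' : u = r' := h2
          subst h2'
          rw [hr'] at hp; cases hp
      | succ m =>
          obtain ⟨q, hq, hsteps'⟩ := h2
          rw [hp] at hq
          injection hq with hq'
          exact ih m p r r' hsteps (hq' ▸ hsteps') hr hr'

theorem pv_rootF_fuel (edges : List (Int × Int)) {f g : Nat} (u : Int)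
    (hf : pvChainEnds edges f u = true) (hg : pvChainEnds edges g u = true) :
    pvRootF edges f u = pvRootF edges g u := by
  obtain ⟨h1, n, _, hs1⟩ := pv_ce_root edges f u hf
  obtain ⟨h2, m, _, hs2⟩ := pv_ce_root edges g u hg
  exact pv_steps_det edges n m u _ _ hs1 hs2 h1 h2

theorem pv_mem_nodes_of_edge (edges : List (Int × Int)) {u v : Int}
    (h : (u, v) ∈ edges) : u ∈ pvNodes edges ∧ v ∈ pvNodes edges := by
  unfold pvNodes
  rw [PySem.Set.mem_ofList, PySem.Set.mem_ofList, List.mem_append, List.mem_append]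
  exact ⟨Or.inr (List.mem_map.mpr ⟨(u, v), h, rfl⟩),
    Or.inl (List.mem_map.mpr ⟨(u, v), h, rfl⟩)⟩

theorem pv_step_mem (edges : List (Int × Int)) {u p : Int}
    (h : pvStep edges u = some p) : p ∈ pvNodes edges ∧ u ∈ pvNodes edges := by
  obtain ⟨h1, _⟩ := (pv_step_some_iff edges u p).mp h
  have : (p, u) ∈ edges := (pv_mem_sin edges p u).mp (by rw [h1]; exact List.mem_singleton.mpr rfl)
  exact pv_mem_nodes_of_edge edges this

theorem pv_step_none_of_not_mem (edges : List (Int × Int)) {u : Int}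
    (h : u ∉ pvNodes edges) : pvStep edges u = none := by
  cases hs : pvStep edges u with
  | none => rfl
  | some p => exact absurd (pv_step_mem edges hs).2 h

theorem pv_ce_of_not_mem (edges : List (Int × Int)) {u : Int}
    (h : u ∉ pvNodes edges) : ∀ f, pvChainEnds edges f u = true := by
  intro f
  cases f with
  | zero => unfold pvChainEnds; rw [pv_step_none_of_not_mem edges h]; rfl
  | succ f => unfold pvChainEnds; rw [pv_step_none_of_not_mem edges h]

theorem pv_ce_all (edges : List (Int × Int))
    (pre2 : ∀ x ∈ pvNodes edges, pvChainEnds edges (pvNodes edges).length x = true)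
    (x : Int) : pvChainEnds edges ((pvNodes edges).length + 1) x = true := by
  by_cases hx : x ∈ pvNodes edges
  · exact pv_ce_le edges (Nat.le_succ _) x (pre2 x hx)
  · exact pv_ce_of_not_mem edges hx _

theorem pv_root_step (edges : List (Int × Int))
    (pre2 : ∀ x ∈ pvNodes edges, pvChainEnds edges (pvNodes edges).length x = true)
    {u p : Int} (h : pvStep edges u = some p) : pvRoot edges u = pvRoot edges p := by
  unfold pvRoot
  have h1 : pvRootF edges ((pvNodes edges).length + 1) u
      = pvRootF edges (pvNodes edges).length p := by
    rw [pvRootF_succ, h]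
  rw [h1]
  exact pv_rootF_fuel edges p (pre2 p (pv_step_mem edges h).1) (pv_ce_all edges pre2 p)

theorem pv_root_none (edges : List (Int × Int)) {u : Int}
    (h : pvStep edges u = none) : pvRoot edges u = u := by
  unfold pvRoot
  rw [pvRootF_succ, h]

theorem pv_root_spec (edges : List (Int × Int))
    (pre2 : ∀ x ∈ pvNodes edges, pvChainEnds edges (pvNodes edges).length x = true)
    (x : Int) : pvStep edges (pvRoot edges x) = none ∧
      ∃ n, n ≤ (pvNodes edges).length + 1 ∧ pvSteps edges n x (pvRoot edges x) :=
  pv_ce_root edges _ x (pv_ce_all edges pre2 x)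

theorem pv_steps_root (edges : List (Int × Int))
    (pre2 : ∀ x ∈ pvNodes edges, pvChainEnds edges (pvNodes edges).length x = true) :
    ∀ (n : Nat) (x r : Int), pvSteps edges n x r → pvStep edges r = none →
      pvRoot edges x = r := by
  intro n
  induction n with
  | zero =>
      intro x r h hr
      have h' : x = r := h
      rw [h']
      exact pv_root_none edges hr
  | succ n ih =>
      intro x r h hr
      obtain ⟨p, hp, hsteps⟩ := h
      rw [pv_root_step edges pre2 hp]
      exact ih p r hsteps hr

theorem pv_steps_last_mem (edges : List (Int × Int)) :
    ∀ (n : Nat) (x r : Int), pvSteps edges (n + 1) x r → r ∈ pvNodes edges := by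
  intro n
  induction n with
  | zero =>
      intro x r h
      obtain ⟨p, hp, hsteps⟩ := h
      have h' : p = r := hsteps
      subst h'
      exact (pv_step_mem edges hp).1
  | succ n ih =>
      intro x r h
      obtain ⟨p, hp, hsteps⟩ := h
      exact ih p r hsteps

theorem pv_root_mem (edges : List (Int × Int))
    (pre2 : ∀ x ∈ pvNodes edges, pvChainEnds edges (pvNodes edges).length x = true)
    {x : Int} (hx : x ∈ pvNodes edges) : pvRoot edges x ∈ pvNodes edges := by
  obtain ⟨_, n, _, hsteps⟩ := pv_root_spec edges pre2 x
  cases n with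
  | zero =>
      have h' : x = pvRoot edges x := hsteps
      rw [← h']
      exact hx
  | succ n => exact pv_steps_last_mem edges n x _ hsteps

theorem pv_root_not_mem (edges : List (Int × Int)) {x : Int}
    (hx : x ∉ pvNodes edges) : pvRoot edges x = x :=
  pv_root_none edges (pv_step_none_of_not_mem edges hx)

-- ---- Phase 3c: the forward walk enumerates a root's chain ----

theorem pv_steps_snoc (edges : List (Int × Int)) :
    ∀ (n : Nat) (x r : Int), pvSteps edges (n + 1) x r ↔
      ∃ w, pvSteps edges n x w ∧ pvStep edges w = some r := by
  intro n
  induction n with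
  | zero =>
      intro x r
      constructor
      · rintro ⟨p, hp, hsteps⟩
        have h' : p = r := hsteps
        subst h'
        exact ⟨x, rfl, hp⟩
      · rintro ⟨w, hw, hstep⟩
        have h' : x = w := hw
        subst h'
        exact ⟨r, hstep, rfl⟩
  | succ n ih =>
      intro x r
      constructor
      · rintro ⟨p, hp, hsteps⟩
        obtain ⟨w, hw, hstep⟩ := (ih p r).mp hsteps
        exact ⟨w, ⟨p, hp, hw⟩, hstep⟩
      · rintro ⟨w, ⟨p, hp, hsteps⟩, hstep⟩
        exact ⟨p, hp, (ih p r).mpr ⟨w, hsteps, hstep⟩⟩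

theorem pv_mem_fwdL (edges : List (Int × Int)) :
    ∀ (f : Nat) (v x : Int), x ∈ pvFwdL edges f v ↔
      ∃ n, 1 ≤ n ∧ n ≤ f ∧ pvSteps edges n x v := by
  intro f
  induction f with
  | zero =>
      intro v x
      constructor
      · intro h; cases h
      · rintro ⟨n, h1, h2, _⟩; omega
  | succ f ih =>
      intro v x
      unfold pvFwdL
      cases hi : pvInvStep edges v with
      | none =>
          simp only [List.not_mem_nil, false_iff]
          rintro ⟨n, h1, h2, hsteps⟩
          cases n with
          | zero => omega
          | succ m =>
              obtain ⟨w, _, hstep⟩ := (pv_steps_snoc edges m x v).mp hsteps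
              rw [pv_step_inv edges w v, hi] at hstep
              cases hstep
      | some w =>
          rw [List.mem_cons]
          constructor
          · rintro (rfl | hmem)
            · exact ⟨1, le_refl 1, by omega,
                ⟨v, (pv_step_inv edges x v).mpr hi, rfl⟩⟩
            · obtain ⟨n, h1, h2, hsteps⟩ := (ih w x).mp hmem
              exact ⟨n + 1, by omega, by omega,
                (pv_steps_snoc edges n x v).mpr ⟨w, hsteps, (pv_step_inv edges w v).mpr hi⟩⟩
          · rintro ⟨n, h1, h2, hsteps⟩
            cases n with
            | zero => omega
            | succ m =>
                obtain ⟨w', hw', hstep⟩ := (pv_steps_snoc edges m x v).mp hsteps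
                rw [pv_step_inv edges w' v, hi] at hstep
                injection hstep with hww
                rw [← hww] at hw'
                cases m with
                | zero =>
                    have h' : x = w := hw'
                    exact Or.inl h'
                | succ m' =>
                    exact Or.inr ((ih w x).mpr ⟨m' + 1, by omega, by omega, hw'⟩)

theorem pv_root_eq_iff_fwd (edges : List (Int × Int))
    (pre2 : ∀ x ∈ pvNodes edges, pvChainEnds edges (pvNodes edges).length x = true)
    {r : Int} (hr : pvStep edges r = none) (x : Int) :
    pvRoot edges x = r ↔ (x = r ∨ x ∈ pvFwdL edges ((pvNodes edges).length + 1) r) := by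
  constructor
  · intro hroot
    obtain ⟨_, n, hn, hsteps⟩ := pv_root_spec edges pre2 x
    rw [hroot] at hsteps
    cases n with
    | zero =>
        have h' : x = r := hsteps
        exact Or.inl h'
    | succ m =>
        exact Or.inr ((pv_mem_fwdL edges _ r x).mpr ⟨m + 1, by omega, hn, hsteps⟩)
  · rintro (rfl | hmem)
    · exact pv_root_none edges hr
    · obtain ⟨n, _, _, hsteps⟩ := (pv_mem_fwdL edges _ r x).mp hmem
      exact pv_steps_root edges pre2 n x r hsteps hr

theorem pvA_fwd_get? (edges : List (Int × Int)) :
    ∀ (f : Nat) (v nid : Int) (cid : PySem.Dict Int Int) (x : Int),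
      (pvA_fwd (pvA_nbs edges).1 (pvA_nbs edges).2 f v nid cid).get? x =
        if x ∈ pvFwdL edges f v then some nid else cid.get? x := by
  intro f
  induction f with
  | zero =>
      intro v nid cid x
      unfold pvFwdL
      simp [pvA_fwd]
  | succ f ih =>
      intro v nid cid x
      show (if _ then pvA_fwd _ _ f _ _ _ else cid).get? x = _
      rw [pv_getD_out, pv_getD_in]
      have hfs : pvFwdL edges (f + 1) v =
          match pvInvStep edges v with
          | some w => w :: pvFwdL edges f w
          | none => [] := rfl
      rw [hfs]
      by_cases hC : (pvSout edges v).length = 1 ∧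
          (pvSin edges ((pvSout edges v).headD 0)).length = 1
      · have hI : pvInvStep edges v = some ((pvSout edges v).headD 0) := by
          unfold pvInvStep; rw [if_pos hC]
        rw [if_pos hC, hI, ih, PySem.Dict.get?_insert]
        simp only [List.mem_cons]
        split_ifs <;> first | rfl | tauto
      · have hI : pvInvStep edges v = none := by
          unfold pvInvStep; rw [if_neg hC]
        rw [if_neg hC, hI]
        simp

theorem pvA_fwd_nodup_keys (edges : List (Int × Int)) :
    ∀ (f : Nat) (v nid : Int) (cid : PySem.Dict Int Int),
      cid.keys.Nodup →
      (pvA_fwd (pvA_nbs edges).1 (pvA_nbs edges).2 f v nid cid).keys.Nodup := by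
  intro f
  induction f with
  | zero => intro v nid cid h; exact h
  | succ f ih =>
      intro v nid cid h
      show (if _ then pvA_fwd _ _ f _ _ _ else cid).keys.Nodup
      split_ifs with hC
      · exact ih _ _ _ (PySem.Dict.nodup_keys_insert _ _ _ h)
      · exact h

-- ---- Phase 4: characterizing A's assignment loop ----

def pvRtab (edges : List (Int × Int)) (t : List Int) : List Int :=
  PySem.List.dedup (t.map (pvRoot edges))

theorem pv_index?_append_ne {l : List Int} {c v : Int} (hne : v ≠ c) :
    PySem.List.index? (l ++ [c]) v = PySem.List.index? l v := by
  by_cases hv : v ∈ l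
  · exact PySem.List.index?_append_of_mem _ hv
  · rw [(PySem.List.index?_eq_none_iff _ _).mpr hv,
      (PySem.List.index?_eq_none_iff _ _).mpr (by simp [hv, hne])]

theorem pv_rtab_append_mem (edges : List (Int × Int)) {t : List Int} {m : Int}
    (h : pvRoot edges m ∈ t.map (pvRoot edges)) :
    pvRtab edges (t ++ [m]) = pvRtab edges t := by
  unfold pvRtab
  rw [List.map_append, List.map_singleton]
  rw [PySem.List.dedup_eq_ofList, PySem.List.dedup_eq_ofList,
    PySem.Set.ofList_append_singleton]
  show (if _ then _ else _) = _
  rw [if_pos]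
  rw [PySem.Set.contains_iff]
  rw [PySem.Set.mem_ofList]
  exact h

theorem pv_rtab_append_new (edges : List (Int × Int)) {t : List Int} {m : Int}
    (h : pvRoot edges m ∉ t.map (pvRoot edges)) :
    pvRtab edges (t ++ [m]) = pvRtab edges t ++ [pvRoot edges m] := by
  unfold pvRtab
  rw [List.map_append, List.map_singleton]
  rw [PySem.List.dedup_eq_ofList, PySem.List.dedup_eq_ofList,
    PySem.Set.ofList_append_singleton]
  show (if _ then _ else _) = _
  rw [if_neg]
  rw [PySem.Set.contains_iff, PySem.Set.mem_ofList]
  exact h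

theorem pv_not_mem_rtab (edges : List (Int × Int)) {t : List Int} {m : Int}
    (h : pvRoot edges m ∉ t.map (pvRoot edges)) :
    pvRoot edges m ∉ pvRtab edges t := by
  unfold pvRtab
  rw [PySem.List.mem_dedup]
  exact h

def pvInvA (edges : List (Int × Int)) (t : List Int) (s : PySem.Dict Int Int × Int) : Prop :=
  (∀ x, s.1.get? x =
    (PySem.List.index? (pvRtab edges t) (pvRoot edges x)).map (fun n : Nat => (n : Int))) ∧
  s.2 = ((pvRtab edges t).length : Int) ∧ s.1.keys.Nodup

theorem pvA_step (edges : List (Int × Int))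
    (pre1 : ∀ x ∈ pvNodes edges, 0 ≤ x ∧ x < ((pvNodes edges).length : Int))
    (pre2 : ∀ x ∈ pvNodes edges, pvChainEnds edges (pvNodes edges).length x = true)
    (t : List Int) (m : Int) (s : PySem.Dict Int Int × Int)
    (hI : pvInvA edges t s) :
    pvInvA edges (t ++ [m])
      (if s.1.contains m then s
       else
        (pvA_fwd (pvA_nbs edges).1 (pvA_nbs edges).2 ((pvA_nodes edges).length + 1)
            (pvA_back (pvA_nbs edges).1 (pvA_nbs edges).2 ((pvA_nodes edges).length + 1) m)
            s.2
            (s.1.insert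
              (pvA_back (pvA_nbs edges).1 (pvA_nbs edges).2 ((pvA_nodes edges).length + 1) m)
              s.2),
          s.2 + 1)) := by
  obtain ⟨hget, hnid, hnodup⟩ := hI
  have hlen : (pvA_nodes edges).length = (pvNodes edges).length := pv_nodes_len edges pre1
  have hcont : s.1.contains m = true ↔ pvRoot edges m ∈ t.map (pvRoot edges) := by
    rw [PySem.Dict.contains_eq_isSome_get?, hget m, Option.isSome_map]
    rw [PySem.List.index?_isSome_iff]
    unfold pvRtab
    rw [PySem.List.mem_dedup]
  by_cases hmem : pvRoot edges m ∈ t.map (pvRoot edges)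
  · rw [if_pos (hcont.mpr hmem)]
    refine ⟨?_, ?_, hnodup⟩
    · intro x
      rw [pv_rtab_append_mem edges hmem]
      exact hget x
    · rw [pv_rtab_append_mem edges hmem]
      exact hnid
  · rw [if_neg (by rw [hcont]; exact hmem)]
    have hu : pvA_back (pvA_nbs edges).1 (pvA_nbs edges).2 ((pvA_nodes edges).length + 1) m
        = pvRoot edges m := by
      rw [pvA_back_eq, hlen]; rfl
    have hrnone : pvStep edges (pvRoot edges m) = none := (pv_root_spec edges pre2 m).1
    have hchain : ∀ x : Int,
        (x = pvRoot edges m ∨ x ∈ pvFwdL edges ((pvNodes edges).length + 1) (pvRoot edges m)) ↔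
          pvRoot edges x = pvRoot edges m :=
      fun x => (pv_root_eq_iff_fwd edges pre2 hrnone x).symm
    refine ⟨?_, ?_, ?_⟩
    · intro x
      show (pvA_fwd _ _ _ _ _ _).get? x = _
      rw [hu, pvA_fwd_get?, hlen, PySem.Dict.get?_insert]
      rw [pv_rtab_append_new edges hmem]
      by_cases hx : pvRoot edges x = pvRoot edges m
      · rw [hx, PySem.List.index?_append_singleton_self _ _ (pv_not_mem_rtab edges hmem)]
        have hd := (hchain x).mpr hx
        by_cases h1 : x ∈ pvFwdL edges ((pvNodes edges).length + 1) (pvRoot edges m)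
        · rw [if_pos h1, Option.map_some, hnid]
        · have h2 : x = pvRoot edges m := by tauto
          rw [if_neg h1, if_pos h2, Option.map_some, hnid]
      · have hnx1 : x ∉ pvFwdL edges ((pvNodes edges).length + 1) (pvRoot edges m) := by
          intro hc
          exact hx ((hchain x).mp (Or.inr hc))
        have hnx2 : x ≠ pvRoot edges m := by
          intro hc
          exact hx ((hchain x).mp (Or.inl hc))
        rw [if_neg hnx1, if_neg hnx2, pv_index?_append_ne hx]
        exact hget x
    · show s.2 + 1 = _
      rw [pv_rtab_append_new edges hmem, hnid]
      have hl : (pvRtab edges t ++ [pvRoot edges m]).length = (pvRtab edges t).length + 1 := by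
        simp
      rw [hl]
      push_cast
      ring
    · show (pvA_fwd _ _ _ _ _ _).keys.Nodup
      exact pvA_fwd_nodup_keys edges _ _ _ _ (PySem.Dict.nodup_keys_insert _ _ _ hnodup)

-- ---- Phase 4b: A's loop invariant, folded ----

theorem pvA_foldl (edges : List (Int × Int))
    (pre1 : ∀ x ∈ pvNodes edges, 0 ≤ x ∧ x < ((pvNodes edges).length : Int))
    (pre2 : ∀ x ∈ pvNodes edges, pvChainEnds edges (pvNodes edges).length x = true) :
    ∀ (l t : List Int) (s : PySem.Dict Int Int × Int), pvInvA edges t s →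
      pvInvA edges (t ++ l)
        (l.foldl
          (fun s node =>
            if s.1.contains node then s
            else
              (pvA_fwd (pvA_nbs edges).1 (pvA_nbs edges).2 ((pvA_nodes edges).length + 1)
                  (pvA_back (pvA_nbs edges).1 (pvA_nbs edges).2 ((pvA_nodes edges).length + 1) node)
                  s.2
                  (s.1.insert
                    (pvA_back (pvA_nbs edges).1 (pvA_nbs edges).2 ((pvA_nodes edges).length + 1) node)
                    s.2),
                s.2 + 1)) s) := by
  intro l
  induction l with
  | nil => intro t s h; simpa using h
  | cons m l ih =>
      intro t s h
      have h1 := pvA_step edges pre1 pre2 t m s h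
      have h2 := ih (t ++ [m]) _ h1
      rw [List.append_assoc] at h2
      simpa using h2

theorem pvA_assign_inv (edges : List (Int × Int))
    (pre1 : ∀ x ∈ pvNodes edges, 0 ≤ x ∧ x < ((pvNodes edges).length : Int))
    (pre2 : ∀ x ∈ pvNodes edges, pvChainEnds edges (pvNodes edges).length x = true) :
    pvInvA edges (pvA_nodes edges) (pvA_assign edges) := by
  have base : pvInvA edges [] (PySem.Dict.empty, 0) := by
    refine ⟨?_, by simp [pvRtab], ?_⟩
    · intro x
      rw [(PySem.List.index?_eq_none_iff _ _).mpr (by simp [pvRtab])]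
      simp [PySem.Dict.get?_empty]
    · show ((PySem.Dict.empty : PySem.Dict Int Int)).keys.Nodup
      exact PySem.Dict.nodup_keys_empty
  have h := pvA_foldl edges pre1 pre2 (pvA_nodes edges) [] (PySem.Dict.empty, 0) base
  rw [List.nil_append] at h
  exact h

theorem pv_root_mem_map_iff (edges : List (Int × Int))
    (pre2 : ∀ x ∈ pvNodes edges, pvChainEnds edges (pvNodes edges).length x = true)
    (x : Int) :
    pvRoot edges x ∈ (pvA_nodes edges).map (pvRoot edges) ↔ x ∈ pvNodes edges := by
  constructor
  · intro h
    obtain ⟨y, hy, hroot⟩ := List.mem_map.mp h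
    by_contra hx
    have h1 : pvRoot edges x = x := pv_root_not_mem edges hx
    have h2 : pvRoot edges y ∈ pvNodes edges :=
      pv_root_mem edges pre2 ((pv_mem_nodes edges y).mp hy)
    rw [hroot, h1] at h2
    exact hx h2
  · intro h
    exact List.mem_map.mpr ⟨x, (pv_mem_nodes edges x).mpr h, rfl⟩

theorem pvA_keys_mem (edges : List (Int × Int))
    (pre1 : ∀ x ∈ pvNodes edges, 0 ≤ x ∧ x < ((pvNodes edges).length : Int))
    (pre2 : ∀ x ∈ pvNodes edges, pvChainEnds edges (pvNodes edges).length x = true)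
    (x : Int) :
    x ∈ (pvA_assign edges).1.keys ↔ x ∈ pvNodes edges := by
  obtain ⟨hget, _, _⟩ := pvA_assign_inv edges pre1 pre2
  rw [← PySem.Dict.contains_iff_mem_keys, PySem.Dict.contains_eq_isSome_get?, hget x,
    Option.isSome_map]
  rw [PySem.List.index?_isSome_iff]
  unfold pvRtab
  rw [PySem.List.mem_dedup]
  exact pv_root_mem_map_iff edges pre2 x

theorem pvA_size (edges : List (Int × Int))
    (pre1 : ∀ x ∈ pvNodes edges, 0 ≤ x ∧ x < ((pvNodes edges).length : Int))
    (pre2 : ∀ x ∈ pvNodes edges, pvChainEnds edges (pvNodes edges).length x = true) :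
    (pvA_assign edges).1.size = (pvNodes edges).length := by
  obtain ⟨_, _, hnodup⟩ := pvA_assign_inv edges pre1 pre2
  have hperm : (pvA_assign edges).1.keys.Perm (pvNodes edges) :=
    (List.perm_ext_iff_of_nodup hnodup (pv_nodes_nodup' edges)).mpr
      (pvA_keys_mem edges pre1 pre2)
  have hlen := hperm.length_eq
  have hsz : (pvA_assign edges).1.size = (pvA_assign edges).1.keys.length := by
    show (pvA_assign edges).1.items.length = ((pvA_assign edges).1.items.map (·.1)).length
    rw [List.length_map]
  rw [hsz, hlen]

-- ---- Phase 5: union-find basics (parent chains, fuel-bounded find) ----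

def pvPf (par : PySem.Dict Int Int) (x : Int) : Int := par.getD x x

def pvIter (par : PySem.Dict Int Int) : Nat → Int → Int
  | 0, x => x
  | n + 1, x => pvIter par n (pvPf par x)

theorem pvIter_const (par : PySem.Dict Int Int) {x : Int} (h : pvPf par x = x) :
    ∀ n, pvIter par n x = x := by
  intro n
  induction n with
  | zero => rfl
  | succ n ih =>
      show pvIter par n (pvPf par x) = x
      rw [h]
      exact ih

theorem pvIter_add (par : PySem.Dict Int Int) :
    ∀ (n m : Nat) (x : Int), pvIter par (n + m) x = pvIter par m (pvIter par n x) := by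
  intro n
  induction n with
  | zero => intro m x; rw [Nat.zero_add]; rfl
  | succ n ih =>
      intro m x
      have hnm : n + 1 + m = (n + m) + 1 := by omega
      rw [hnm]
      show pvIter par (n + m) (pvPf par x) = _
      rw [ih m (pvPf par x)]
      rfl

theorem pvFind_fix (par : PySem.Dict Int Int) {r : Int} (h : pvPf par r = r) :
    ∀ f, pvB_find par f r = r := by
  intro f
  cases f with
  | zero => rfl
  | succ f =>
      show (if par.getD r r = r then r else pvB_find par f (par.getD r r)) = r
      have h' : par.getD r r = r := h
      rw [if_pos h']

theorem pvFind_eq (par : PySem.Dict Int Int) :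
    ∀ (n : Nat) (x r : Int) (f : Nat), pvIter par n x = r → pvPf par r = r → n ≤ f →
      pvB_find par f x = r := by
  intro n
  induction n with
  | zero =>
      intro x r f hiter hfix _
      cases hiter
      exact pvFind_fix par hfix f
  | succ n ih =>
      intro x r f hiter hfix hle
      by_cases hx : pvPf par x = x
      · have : pvIter par (n + 1) x = x := pvIter_const par hx (n + 1)
        rw [this] at hiter
        cases hiter
        exact pvFind_fix par hx f
      · cases f with
        | zero => omega
        | succ f =>
            show (if par.getD x x = x then x else pvB_find par f (par.getD x x)) = r
            have hx' : ¬ par.getD x x = x := hx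
            rw [if_neg hx']
            exact ih (pvPf par x) r f hiter hfix (by omega)

theorem pvIter_mem (par : PySem.Dict Int Int) (S : List Int)
    (hmap : ∀ x ∈ S, pvPf par x ∈ S) :
    ∀ (n : Nat) (x : Int), x ∈ S → pvIter par n x ∈ S := by
  intro n
  induction n with
  | zero => intro x hx; exact hx
  | succ n ih =>
      intro x hx
      exact ih (pvPf par x) (hmap x hx)

theorem pv_fix_bound (S : List Int) (hnd : S.Nodup) (par : PySem.Dict Int Int)
    (hmap : ∀ x ∈ S, pvPf par x ∈ S) {x : Int} (hx : x ∈ S)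
    (hterm : ∃ n, pvPf par (pvIter par n x) = pvIter par n x) :
    ∃ n, n < S.length ∧ pvPf par (pvIter par n x) = pvIter par n x := by
  let n := Nat.find hterm
  have hfix : pvPf par (pvIter par n x) = pvIter par n x := Nat.find_spec hterm
  have hmin : ∀ m, m < n → ¬ pvPf par (pvIter par m x) = pvIter par m x :=
    fun m hm => Nat.find_min hterm hm
  refine ⟨n, ?_, hfix⟩
  by_contra hbig
  have hinj : ∀ i j, i < j → j ≤ n → pvIter par i x ≠ pvIter par j x := by
    intro i j hij hjn heq
    have hshift : pvIter par (i + (n - j)) x = pvIter par n x := by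
      rw [pvIter_add, heq, ← pvIter_add]
      congr 1
      omega
    have : pvPf par (pvIter par (i + (n - j)) x) = pvIter par (i + (n - j)) x := by
      rw [hshift]
      exact hfix
    exact hmin (i + (n - j)) (by omega) this
  have hnodup : ((List.range (n + 1)).map (fun i => pvIter par i x)).Nodup := by
    refine List.Nodup.map_on ?_ List.nodup_range
    intro i hi j hj heq
    by_contra hne
    rcases Nat.lt_or_ge i j with h | h
    · exact hinj i j h (by simpa using Nat.lt_succ_iff.mp (List.mem_range.mp hj)) heq
    · have : j < i := by omega
      exact hinj j i this (Nat.lt_succ_iff.mp (List.mem_range.mp hi)) heq.symm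
  have hsub : ((List.range (n + 1)).map (fun i => pvIter par i x)).toFinset ⊆ S.toFinset := by
    intro y hy
    rw [List.mem_toFinset] at hy
    obtain ⟨i, _, rfl⟩ := List.mem_map.mp hy
    rw [List.mem_toFinset]
    exact pvIter_mem par S hmap i x hx
  have hcard := Finset.card_le_card hsub
  rw [List.toFinset_card_of_nodup hnodup, List.toFinset_card_of_nodup hnd] at hcard
  simp at hcard
  omega

-- ---- Phase 6: union-find invariant over the edge loop ----

def pvCollEdge (edges : List (Int × Int)) (uv : Int × Int) : Prop :=
  (pvSout edges uv.1).length = 1 ∧ (pvSin edges uv.2).length = 1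

def pvK (edges : List (Int × Int)) : Nat := (pvB_nodes edges).length + 1

def pvUF (edges : List (Int × Int)) (p : List (Int × Int)) (par : PySem.Dict Int Int) : Prop :=
  (∀ x : Int, (par.get? x).isSome = true ↔ x ∈ pvNodes edges) ∧
  (∀ x v : Int, par.get? x = some v → v ∈ pvNodes edges) ∧
  (∀ x ∈ pvNodes edges, ∃ n, pvPf par (pvIter par n x) = pvIter par n x) ∧
  (∀ x ∈ pvNodes edges, pvRoot edges (pvPf par x) = pvRoot edges x) ∧
  (∀ uv ∈ p, pvCollEdge edges uv →
    pvB_find par (pvK edges) uv.1 = pvB_find par (pvK edges) uv.2)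

theorem pvK_eq (edges : List (Int × Int))
    (pre1 : ∀ x ∈ pvNodes edges, 0 ≤ x ∧ x < ((pvNodes edges).length : Int)) :
    pvK edges = (pvNodes edges).length + 1 := by
  unfold pvK
  have h : pvB_nodes edges = pvA_nodes edges := rfl
  rw [h, pv_nodes_len edges pre1]

theorem pv_pf_mem (edges : List (Int × Int)) (par : PySem.Dict Int Int)
    (h1 : ∀ x : Int, (par.get? x).isSome = true ↔ x ∈ pvNodes edges)
    (h2 : ∀ x v : Int, par.get? x = some v → v ∈ pvNodes edges)
    {x : Int} (hx : x ∈ pvNodes edges) : pvPf par x ∈ pvNodes edges := by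
  have := (h1 x).mpr hx
  obtain ⟨v, hv⟩ := Option.isSome_iff_exists.mp this
  have : pvPf par x = v := by
    unfold pvPf
    rw [PySem.Dict.getD_eq_get?_getD, hv]
    rfl
  rw [this]
  exact h2 x v hv

theorem pv_find_props (edges : List (Int × Int))
    (pre1 : ∀ x ∈ pvNodes edges, 0 ≤ x ∧ x < ((pvNodes edges).length : Int))
    (par : PySem.Dict Int Int)
    (h1 : ∀ x : Int, (par.get? x).isSome = true ↔ x ∈ pvNodes edges)
    (h2 : ∀ x v : Int, par.get? x = some v → v ∈ pvNodes edges)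
    (h3 : ∀ x ∈ pvNodes edges, ∃ n, pvPf par (pvIter par n x) = pvIter par n x)
    {x : Int} (hx : x ∈ pvNodes edges) :
    ∃ n, n < (pvNodes edges).length ∧ pvIter par n x = pvB_find par (pvK edges) x ∧
      pvPf par (pvB_find par (pvK edges) x) = pvB_find par (pvK edges) x ∧
      pvB_find par (pvK edges) x ∈ pvNodes edges := by
  obtain ⟨n, hn, hfix⟩ := pv_fix_bound (pvNodes edges) (pv_nodes_nodup' edges) par
    (fun y hy => pv_pf_mem edges par h1 h2 hy) hx (h3 x hx)
  have hfind : pvB_find par (pvK edges) x = pvIter par n x := by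
    apply pvFind_eq par n x _ _ rfl hfix
    rw [pvK_eq edges pre1]
    omega
  refine ⟨n, hn, hfind.symm, ?_, ?_⟩
  · rw [hfind]; exact hfix
  · rw [hfind]
    exact pvIter_mem par (pvNodes edges) (fun y hy => pv_pf_mem edges par h1 h2 hy) n x hx

theorem pvIter_root (edges : List (Int × Int)) (par : PySem.Dict Int Int)
    (h1 : ∀ x : Int, (par.get? x).isSome = true ↔ x ∈ pvNodes edges)
    (h2 : ∀ x v : Int, par.get? x = some v → v ∈ pvNodes edges)
    (h4 : ∀ x ∈ pvNodes edges, pvRoot edges (pvPf par x) = pvRoot edges x) :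
    ∀ (n : Nat) (x : Int), x ∈ pvNodes edges →
      pvRoot edges (pvIter par n x) = pvRoot edges x := by
  intro n
  induction n with
  | zero => intro x _; rfl
  | succ n ih =>
      intro x hx
      show pvRoot edges (pvIter par n (pvPf par x)) = pvRoot edges x
      rw [ih (pvPf par x) (pv_pf_mem edges par h1 h2 hx), h4 x hx]

theorem pv_iter_transport (par : PySem.Dict Int Int) {ru rv : Int} :
    ∀ (m : Nat) (x : Int), (∀ i, i < m → pvIter par i x ≠ ru) →
      pvIter (par.insert ru rv) m x = pvIter par m x := by
  intro m
  induction m with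
  | zero => intro x _; rfl
  | succ m ih =>
      intro x h
      have hm := ih x (fun i hi => h i (by omega))
      have h1 : pvIter (par.insert ru rv) (m + 1) x
          = pvPf (par.insert ru rv) (pvIter (par.insert ru rv) m x) := by
        rw [pvIter_add (par.insert ru rv) m 1 x]
        rfl
      have h2 : pvIter par (m + 1) x = pvPf par (pvIter par m x) := by
        rw [pvIter_add par m 1 x]
        rfl
      rw [h1, h2, hm]
      unfold pvPf
      rw [PySem.Dict.getD_insert]
      rw [if_neg (h m (by omega))]

-- ---- Phase 6b: how one union changes find ----

theorem pv_find_insert (edges : List (Int × Int))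
    (pre1 : ∀ x ∈ pvNodes edges, 0 ≤ x ∧ x < ((pvNodes edges).length : Int))
    (par : PySem.Dict Int Int)
    (h1 : ∀ x : Int, (par.get? x).isSome = true ↔ x ∈ pvNodes edges)
    (h2 : ∀ x v : Int, par.get? x = some v → v ∈ pvNodes edges)
    (h3 : ∀ x ∈ pvNodes edges, ∃ n, pvPf par (pvIter par n x) = pvIter par n x)
    {ru rv : Int} (hfru : pvPf par ru = ru) (hfrv : pvPf par rv = rv) (hne : ru ≠ rv) :
    ∀ x ∈ pvNodes edges,
      pvB_find (par.insert ru rv) (pvK edges) x =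
        (if pvB_find par (pvK edges) x = ru then rv else pvB_find par (pvK edges) x) ∧
      ∃ n, pvPf (par.insert ru rv) (pvIter (par.insert ru rv) n x)
          = pvIter (par.insert ru rv) n x := by
  intro x hx
  obtain ⟨n, hn, hiter, hfix, hmem⟩ := pv_find_props edges pre1 par h1 h2 h3 hx
  have hpf' : ∀ y, pvPf (par.insert ru rv) y = if y = ru then rv else pvPf par y := by
    intro y
    unfold pvPf
    rw [PySem.Dict.getD_insert]
  have hfrv' : pvPf (par.insert ru rv) rv = rv := by
    rw [hpf' rv, if_neg (Ne.symm hne)]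
    exact hfrv
  by_cases hcase : pvB_find par (pvK edges) x = ru
  · have hex : ∃ i, pvIter par i x = ru := ⟨n, by rw [hiter, hcase]⟩
    have hi0 : pvIter par (Nat.find hex) x = ru := Nat.find_spec hex
    have hi0le : Nat.find hex ≤ n := Nat.find_min' hex (by rw [hiter, hcase])
    have htr : pvIter (par.insert ru rv) (Nat.find hex) x = ru := by
      rw [pv_iter_transport par (Nat.find hex) x
        (fun i hi => Nat.find_min hex hi)]
      exact hi0
    have hnext : pvIter (par.insert ru rv) (Nat.find hex + 1) x = rv := by
      rw [pvIter_add (par.insert ru rv) (Nat.find hex) 1 x]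
      show pvPf (par.insert ru rv) (pvIter (par.insert ru rv) (Nat.find hex) x) = rv
      rw [htr, hpf' ru, if_pos rfl]
    have hfind' : pvB_find (par.insert ru rv) (pvK edges) x = rv := by
      apply pvFind_eq _ (Nat.find hex + 1) x rv _ hnext hfrv'
      rw [pvK_eq edges pre1]
      omega
    rw [if_pos hcase]
    exact ⟨hfind', ⟨Nat.find hex + 1, by rw [hnext]; exact hfrv'⟩⟩
  · have hnever : ∀ i, i ≤ n → pvIter par i x ≠ ru := by
      intro i hi hcontra
      have hitern : pvIter par n x = ru := by
        have hsplit : n = i + (n - i) := by omega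
        rw [hsplit, pvIter_add, hcontra]
        exact pvIter_const par hfru (n - i)
      rw [hiter] at hitern
      exact hcase hitern
    have htr : pvIter (par.insert ru rv) n x = pvB_find par (pvK edges) x := by
      rw [pv_iter_transport par n x (fun i hi => hnever i (by omega))]
      exact hiter
    have hfix' : pvPf (par.insert ru rv) (pvB_find par (pvK edges) x)
        = pvB_find par (pvK edges) x := by
      rw [hpf' _, if_neg hcase]
      exact hfix
    have hfind' : pvB_find (par.insert ru rv) (pvK edges) x = pvB_find par (pvK edges) x := by
      apply pvFind_eq _ n x _ _ htr hfix'
      rw [pvK_eq edges pre1]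
      omega
    rw [if_neg hcase]
    exact ⟨hfind', ⟨n, by rw [htr]; exact hfix'⟩⟩

-- ---- Phase 6c: the whole union loop keeps the invariant ----

theorem pvUF_step (edges : List (Int × Int))
    (pre1 : ∀ x ∈ pvNodes edges, 0 ≤ x ∧ x < ((pvNodes edges).length : Int))
    (pre2 : ∀ x ∈ pvNodes edges, pvChainEnds edges (pvNodes edges).length x = true)
    (t : List (Int × Int)) (uv : Int × Int) (huv : uv ∈ edges)
    (ht : ∀ e ∈ t, e ∈ edges)
    (par : PySem.Dict Int Int) (h : pvUF edges t par) :
    pvUF edges (t ++ [uv])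
      (if ((pvB_nbs edges).2.getD uv.1 []).length = 1 ∧
          ((pvB_nbs edges).1.getD uv.2 []).length = 1 then
        if pvB_find par ((pvB_nodes edges).length + 1) uv.1 ≠
            pvB_find par ((pvB_nodes edges).length + 1) uv.2 then
          par.insert (pvB_find par ((pvB_nodes edges).length + 1) uv.1)
            (pvB_find par ((pvB_nodes edges).length + 1) uv.2)
        else par
      else par) := by
  obtain ⟨h1, h2, h3, h4, h5⟩ := h
  have hKr : (pvB_nodes edges).length + 1 = pvK edges := rfl
  have hbeq : pvB_nbs edges = pvA_nbs edges := rfl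
  rw [hKr, hbeq, pv_getD_out, pv_getD_in]
  have huv12 : (uv.1, uv.2) ∈ edges := by simpa using huv
  have hu1 : uv.1 ∈ pvNodes edges := (pv_mem_nodes_of_edge edges huv12).1
  have hu2 : uv.2 ∈ pvNodes edges := (pv_mem_nodes_of_edge edges huv12).2
  by_cases hC : (pvSout edges uv.1).length = 1 ∧ (pvSin edges uv.2).length = 1
  · rw [if_pos hC]
    by_cases hne : pvB_find par (pvK edges) uv.1 ≠ pvB_find par (pvK edges) uv.2
    · rw [if_pos hne]
      obtain ⟨n1, hn1, hiter1, hfix1, hmem1⟩ := pv_find_props edges pre1 par h1 h2 h3 hu1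
      obtain ⟨n2, hn2, hiter2, hfix2, hmem2⟩ := pv_find_props edges pre1 par h1 h2 h3 hu2
      have hfi := pv_find_insert edges pre1 par h1 h2 h3 hfix1 hfix2 hne
      -- roots of the two representatives agree
      have hrootu : pvRoot edges (pvB_find par (pvK edges) uv.1) = pvRoot edges uv.1 := by
        rw [← hiter1]
        exact pvIter_root edges par h1 h2 h4 n1 uv.1 hu1
      have hrootv : pvRoot edges (pvB_find par (pvK edges) uv.2) = pvRoot edges uv.2 := by
        rw [← hiter2]
        exact pvIter_root edges par h1 h2 h4 n2 uv.2 hu2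
      have hsinx : pvSin edges uv.2 = [uv.1] := by
        have hm : uv.1 ∈ pvSin edges uv.2 := (pv_mem_sin edges uv.1 uv.2).mpr huv12
      -- a length-1 list containing uv.1 is [uv.1]
        have hs := pv_list_len_one hC.2
        rw [hs] at hm ⊢
        have hmm : uv.1 = (pvSin edges uv.2).headD 0 := by simpa using hm
        rw [← hmm]
      have hstep : pvStep edges uv.2 = some uv.1 :=
        (pv_step_some_iff edges uv.2 uv.1).mpr ⟨hsinx, hC.1⟩
      have hrr : pvRoot edges (pvB_find par (pvK edges) uv.2)
          = pvRoot edges (pvB_find par (pvK edges) uv.1) := by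
        rw [hrootu, hrootv]
        exact pv_root_step edges pre2 hstep
      refine ⟨?_, ?_, ?_, ?_, ?_⟩
      · intro x
        rw [PySem.Dict.get?_insert]
        by_cases hx : x = pvB_find par (pvK edges) uv.1
        · rw [if_pos hx]
          simp only [Option.isSome_some, true_iff]
          rw [hx]
          exact hmem1
        · rw [if_neg hx]
          exact h1 x
      · intro x v hv
        rw [PySem.Dict.get?_insert] at hv
        by_cases hx : x = pvB_find par (pvK edges) uv.1
        · rw [if_pos hx] at hv
          injection hv with hv'
          rw [← hv']
          exact hmem2
        · rw [if_neg hx] at hv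
          exact h2 x v hv
      · intro x hx
        exact (hfi x hx).2
      · intro x hx
        have hpf : pvPf (par.insert (pvB_find par (pvK edges) uv.1)
            (pvB_find par (pvK edges) uv.2)) x =
            if x = pvB_find par (pvK edges) uv.1 then pvB_find par (pvK edges) uv.2
            else pvPf par x := by
          unfold pvPf
          rw [PySem.Dict.getD_insert]
        rw [hpf]
        by_cases hx1 : x = pvB_find par (pvK edges) uv.1
        · rw [if_pos hx1, hx1]
          rw [hrr]
        · rw [if_neg hx1]
          exact h4 x hx
      · intro uv' hmem hcoll
        rcases List.mem_append.mp hmem with hold | hnew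
        · have he' : (uv'.1, uv'.2) ∈ edges := by simpa using ht uv' hold
          have h1' : uv'.1 ∈ pvNodes edges := (pv_mem_nodes_of_edge edges he').1
          have h2' : uv'.2 ∈ pvNodes edges := (pv_mem_nodes_of_edge edges he').2
          rw [(hfi uv'.1 h1').1, (hfi uv'.2 h2').1, h5 uv' hold hcoll]
        · have huv' : uv' = uv := by simpa using hnew
          subst huv'
          rw [(hfi uv'.1 hu1).1, (hfi uv'.2 hu2).1]
          rw [if_pos rfl, if_neg (fun hc => hne hc.symm)]
    · rw [if_neg hne]
      have heq : pvB_find par (pvK edges) uv.1 = pvB_find par (pvK edges) uv.2 := by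
        by_contra hc
        exact hne hc
      refine ⟨h1, h2, h3, h4, ?_⟩
      intro uv' hmem hcoll
      rcases List.mem_append.mp hmem with hold | hnew
      · exact h5 uv' hold hcoll
      · have huv' : uv' = uv := by simpa using hnew
        subst huv'
        exact heq
  · rw [if_neg hC]
    refine ⟨h1, h2, h3, h4, ?_⟩
    intro uv' hmem hcoll
    rcases List.mem_append.mp hmem with hold | hnew
    · exact h5 uv' hold hcoll
    · have huv' : uv' = uv := by simpa using hnew
      subst huv'
      exact absurd hcoll hC

-- ---- Phase 6d: the parent dict after the whole loop; find = chain root ----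

theorem pv_par0_get? :
    ∀ (l : List Int) (d : PySem.Dict Int Int) (x : Int),
      (l.foldl (fun d x => d.insert x x) d).get? x = if x ∈ l then some x else d.get? x := by
  intro l
  induction l with
  | nil => intro d x; simp
  | cons m l ih =>
      intro d x
      show (l.foldl (fun d x => d.insert x x) (d.insert m m)).get? x = _
      rw [ih]
      by_cases hl : x ∈ l
      · rw [if_pos hl, if_pos (List.mem_cons.mpr (Or.inr hl))]
      · rw [if_neg hl, PySem.Dict.get?_insert]
        by_cases hm : x = m
        · rw [if_pos hm, if_pos (List.mem_cons.mpr (Or.inl hm)), hm]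
        · rw [if_neg hm, if_neg (by simp [hm, hl])]

theorem pvUF_foldl (edges : List (Int × Int))
    (pre1 : ∀ x ∈ pvNodes edges, 0 ≤ x ∧ x < ((pvNodes edges).length : Int))
    (pre2 : ∀ x ∈ pvNodes edges, pvChainEnds edges (pvNodes edges).length x = true) :
    ∀ (l t : List (Int × Int)) (par : PySem.Dict Int Int),
      (∀ e ∈ t, e ∈ edges) → (∀ e ∈ l, e ∈ edges) → pvUF edges t par →
      pvUF edges (t ++ l)
        (l.foldl
          (fun par uv =>
            if ((pvB_nbs edges).2.getD uv.1 []).length = 1 ∧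
                ((pvB_nbs edges).1.getD uv.2 []).length = 1 then
              if pvB_find par ((pvB_nodes edges).length + 1) uv.1 ≠
                  pvB_find par ((pvB_nodes edges).length + 1) uv.2 then
                par.insert (pvB_find par ((pvB_nodes edges).length + 1) uv.1)
                  (pvB_find par ((pvB_nodes edges).length + 1) uv.2)
              else par
            else par) par) := by
  intro l
  induction l with
  | nil => intro t par ht _ h; simpa using h
  | cons uv l ih =>
      intro t par ht hl h
      have h1 := pvUF_step edges pre1 pre2 t uv (hl uv (List.mem_cons_self))
        ht par h
      have h2 := ih (t ++ [uv]) _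
        (by
          intro e he
          rcases List.mem_append.mp he with he' | he'
          · exact ht e he'
          · have : e = uv := by simpa using he'
            rw [this]
            exact hl uv List.mem_cons_self)
        (fun e he => hl e (List.mem_cons.mpr (Or.inr he))) h1
      rw [List.append_assoc] at h2
      simpa using h2

theorem pvB_parent_UF (edges : List (Int × Int))
    (pre1 : ∀ x ∈ pvNodes edges, 0 ≤ x ∧ x < ((pvNodes edges).length : Int))
    (pre2 : ∀ x ∈ pvNodes edges, pvChainEnds edges (pvNodes edges).length x = true) :
    pvUF edges edges (pvB_parent edges) := by
  have hbase : pvUF edges []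
      ((pvB_nodes edges).foldl (fun d x => d.insert x x) PySem.Dict.empty) := by
    have hget : ∀ x : Int,
        ((pvB_nodes edges).foldl (fun d x => d.insert x x) PySem.Dict.empty).get? x
          = if x ∈ pvB_nodes edges then some x else none := by
      intro x
      rw [pv_par0_get?]
      by_cases hx : x ∈ pvB_nodes edges
      · rw [if_pos hx, if_pos hx]
      · rw [if_neg hx, if_neg hx, PySem.Dict.get?_empty]
    have hmemB : ∀ x : Int, x ∈ pvB_nodes edges ↔ x ∈ pvNodes edges := by
      intro x
      have hb : pvB_nodes edges = pvA_nodes edges := rfl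
      rw [hb]
      exact pv_mem_nodes edges x
    have hpf : ∀ x ∈ pvNodes edges,
        pvPf ((pvB_nodes edges).foldl (fun d x => d.insert x x) PySem.Dict.empty) x = x := by
      intro x hx
      unfold pvPf
      rw [PySem.Dict.getD_eq_get?_getD, hget x, if_pos ((hmemB x).mpr hx)]
      rfl
    refine ⟨?_, ?_, ?_, ?_, ?_⟩
    · intro x
      rw [hget x]
      by_cases hx : x ∈ pvB_nodes edges
      · simp [hx, (hmemB x).mp hx]
      · simp only [if_neg hx, Option.isSome_none]
        constructor
        · intro hc; cases hc
        · intro hc; exact absurd ((hmemB x).mpr hc) hx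
    · intro x v hv
      rw [hget x] at hv
      by_cases hx : x ∈ pvB_nodes edges
      · rw [if_pos hx] at hv
        injection hv with hv'
        rw [← hv']
        exact (hmemB x).mp hx
      · rw [if_neg hx] at hv
        cases hv
    · intro x hx
      exact ⟨0, hpf x hx⟩
    · intro x hx
      rw [hpf x hx]
    · intro uv hmem
      cases hmem
  have h := pvUF_foldl edges pre1 pre2 edges [] _ (by intro e he; cases he)
    (fun e he => he) hbase
  rw [List.nil_append] at h
  exact h

theorem pv_find_chain (edges : List (Int × Int))
    (pre1 : ∀ x ∈ pvNodes edges, 0 ≤ x ∧ x < ((pvNodes edges).length : Int))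
    (pre2 : ∀ x ∈ pvNodes edges, pvChainEnds edges (pvNodes edges).length x = true) :
    ∀ (n : Nat) (x r : Int), pvSteps edges n x r →
      pvB_find (pvB_parent edges) (pvK edges) x
        = pvB_find (pvB_parent edges) (pvK edges) r := by
  have h5 := (pvB_parent_UF edges pre1 pre2).2.2.2.2
  intro n
  induction n with
  | zero =>
      intro x r h
      have h' : x = r := h
      rw [h']
  | succ n ih =>
      intro x r h
      obtain ⟨p, hp, hsteps⟩ := h
      obtain ⟨hsin, hlen⟩ := (pv_step_some_iff edges x p).mp hp
      have hedge : (p, x) ∈ edges :=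
        (pv_mem_sin edges p x).mp (by rw [hsin]; exact List.mem_singleton.mpr rfl)
      have hcoll : pvCollEdge edges (p, x) := ⟨hlen, by simp [hsin]⟩
      have := h5 (p, x) hedge hcoll
      rw [← ih p r hsteps]
      exact this.symm

theorem pv_find_iff (edges : List (Int × Int))
    (pre1 : ∀ x ∈ pvNodes edges, 0 ≤ x ∧ x < ((pvNodes edges).length : Int))
    (pre2 : ∀ x ∈ pvNodes edges, pvChainEnds edges (pvNodes edges).length x = true)
    {x y : Int} (hx : x ∈ pvNodes edges) (hy : y ∈ pvNodes edges) :
    pvB_find (pvB_parent edges) (pvK edges) x = pvB_find (pvB_parent edges) (pvK edges) y ↔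
      pvRoot edges x = pvRoot edges y := by
  obtain ⟨h1, h2, h3, h4, _⟩ := pvB_parent_UF edges pre1 pre2
  constructor
  · intro h
    obtain ⟨n1, _, hiter1, _, _⟩ := pv_find_props edges pre1 _ h1 h2 h3 hx
    obtain ⟨n2, _, hiter2, _, _⟩ := pv_find_props edges pre1 _ h1 h2 h3 hy
    have e1 : pvRoot edges (pvB_find (pvB_parent edges) (pvK edges) x) = pvRoot edges x := by
      rw [← hiter1]
      exact pvIter_root edges _ h1 h2 h4 n1 x hx
    have e2 : pvRoot edges (pvB_find (pvB_parent edges) (pvK edges) y) = pvRoot edges y := by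
      rw [← hiter2]
      exact pvIter_root edges _ h1 h2 h4 n2 y hy
    rw [← e1, ← e2, h]
  · intro h
    obtain ⟨_, n1, _, hs1⟩ := pv_root_spec edges pre2 x
    obtain ⟨_, n2, _, hs2⟩ := pv_root_spec edges pre2 y
    have hf1 := pv_find_chain edges pre1 pre2 n1 x _ hs1
    have hf2 := pv_find_chain edges pre1 pre2 n2 y _ hs2
    rw [hf1, hf2, h]

-- ---- Phase 7: characterizing B's numbering loop ----

def pvFnd (edges : List (Int × Int)) (x : Int) : Int :=
  pvB_find (pvB_parent edges) (pvK edges) x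

def pvFtab (edges : List (Int × Int)) (t : List Int) : List Int :=
  PySem.List.dedup (t.map (pvFnd edges))

theorem pv_ftab_append_mem (edges : List (Int × Int)) {t : List Int} {m : Int}
    (h : pvFnd edges m ∈ t.map (pvFnd edges)) :
    pvFtab edges (t ++ [m]) = pvFtab edges t := by
  unfold pvFtab
  rw [List.map_append, List.map_singleton, PySem.List.dedup_eq_ofList,
    PySem.List.dedup_eq_ofList, PySem.Set.ofList_append_singleton]
  show (if _ then _ else _) = _
  rw [if_pos]
  rw [PySem.Set.contains_iff, PySem.Set.mem_ofList]
  exact h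

theorem pv_ftab_append_new (edges : List (Int × Int)) {t : List Int} {m : Int}
    (h : pvFnd edges m ∉ t.map (pvFnd edges)) :
    pvFtab edges (t ++ [m]) = pvFtab edges t ++ [pvFnd edges m] := by
  unfold pvFtab
  rw [List.map_append, List.map_singleton, PySem.List.dedup_eq_ofList,
    PySem.List.dedup_eq_ofList, PySem.Set.ofList_append_singleton]
  show (if _ then _ else _) = _
  rw [if_neg]
  rw [PySem.Set.contains_iff, PySem.Set.mem_ofList]
  exact h

def pvInvB (edges : List (Int × Int)) (t : List Int)
    (s : PySem.Dict Int Int × (PySem.Dict Int Int × Int)) : Prop :=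
  (∀ x : Int, s.1.get? x =
    if x ∈ t then
      (PySem.List.index? (pvFtab edges t) (pvFnd edges x)).map (fun n : Nat => (n : Int))
    else none) ∧
  (∀ r : Int, s.2.1.get? r =
    (PySem.List.index? (pvFtab edges t) r).map (fun n : Nat => (n : Int))) ∧
  s.2.2 = ((pvFtab edges t).length : Int) ∧
  s.1.keys = t

theorem pvB_step (edges : List (Int × Int)) (t : List Int) (m : Int) (hm : m ∉ t)
    (s : PySem.Dict Int Int × (PySem.Dict Int Int × Int)) (hI : pvInvB edges t s) :
    pvInvB edges (t ++ [m])
      (match s.2.1.get? (pvB_find (pvB_parent edges) ((pvB_nodes edges).length + 1) m) with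
       | some i => (s.1.insert m i, s.2)
       | none =>
          (s.1.insert m s.2.2,
           (s.2.1.insert (pvB_find (pvB_parent edges) ((pvB_nodes edges).length + 1) m) s.2.2,
            s.2.2 + 1))) := by
  obtain ⟨hcid, hroots, hnid, hkeys⟩ := hI
  have hKr : pvB_find (pvB_parent edges) ((pvB_nodes edges).length + 1) m = pvFnd edges m := rfl
  rw [hKr, hroots (pvFnd edges m)]
  have hcontm : s.1.contains m = false := by
    rw [PySem.Dict.contains_eq_isSome_get?, hcid m, if_neg hm]
    rfl
  by_cases hmem : pvFnd edges m ∈ t.map (pvFnd edges)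
  · have hmem' : pvFnd edges m ∈ pvFtab edges t := by
      unfold pvFtab
      rw [PySem.List.mem_dedup]
      exact hmem
    obtain ⟨i, hidx⟩ := Option.isSome_iff_exists.mp
      ((PySem.List.index?_isSome_iff _ _).mpr hmem')
    rw [hidx]
    show pvInvB edges (t ++ [m]) (s.1.insert m (i : Int), s.2)
    refine ⟨?_, ?_, ?_, ?_⟩
    · intro x
      rw [PySem.Dict.get?_insert, pv_ftab_append_mem edges hmem]
      by_cases hx : x = m
      · rw [if_pos hx, if_pos (by rw [hx]; exact List.mem_append.mpr (Or.inr (by simp)))]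
        rw [hx, hidx]
        rfl
      · rw [if_neg hx, hcid x]
        by_cases hxt : x ∈ t
        · rw [if_pos hxt, if_pos (List.mem_append.mpr (Or.inl hxt))]
        · rw [if_neg hxt, if_neg (by simp [hxt, hx])]
    · intro r
      rw [pv_ftab_append_mem edges hmem]
      exact hroots r
    · rw [pv_ftab_append_mem edges hmem]
      exact hnid
    · rw [PySem.Dict.keys_insert_of_not_contains _ _ hcontm, hkeys]
  · have hnmem' : pvFnd edges m ∉ pvFtab edges t := by
      unfold pvFtab
      rw [PySem.List.mem_dedup]
      exact hmem
    rw [(PySem.List.index?_eq_none_iff _ _).mpr hnmem']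
    show pvInvB edges (t ++ [m])
      (s.1.insert m s.2.2, (s.2.1.insert (pvFnd edges m) s.2.2, s.2.2 + 1))
    refine ⟨?_, ?_, ?_, ?_⟩
    · intro x
      rw [PySem.Dict.get?_insert, pv_ftab_append_new edges hmem]
      by_cases hx : x = m
      · rw [if_pos hx, if_pos (by rw [hx]; exact List.mem_append.mpr (Or.inr (by simp)))]
        rw [hx, PySem.List.index?_append_singleton_self _ _ hnmem', hnid]
        rfl
      · rw [if_neg hx, hcid x]
        by_cases hxt : x ∈ t
        · rw [if_pos hxt, if_pos (List.mem_append.mpr (Or.inl hxt))]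
          have hfx : pvFnd edges x ∈ pvFtab edges t := by
            unfold pvFtab
            rw [PySem.List.mem_dedup]
            exact List.mem_map.mpr ⟨x, hxt, rfl⟩
          rw [PySem.List.index?_append_of_mem _ hfx]
        · rw [if_neg hxt, if_neg (by simp [hxt, hx])]
    · intro r
      rw [PySem.Dict.get?_insert, pv_ftab_append_new edges hmem]
      by_cases hr : r = pvFnd edges m
      · rw [if_pos hr, hr, PySem.List.index?_append_singleton_self _ _ hnmem', hnid]
        rfl
      · rw [if_neg hr, hroots r, pv_index?_append_ne hr]
    · rw [pv_ftab_append_new edges hmem, hnid]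
      have hl : (pvFtab edges t ++ [pvFnd edges m]).length = (pvFtab edges t).length + 1 := by
        simp
      rw [hl]
      push_cast
      ring
    · rw [PySem.Dict.keys_insert_of_not_contains _ _ hcontm, hkeys]

theorem pvB_foldl (edges : List (Int × Int)) :
    ∀ (l t : List Int) (s : PySem.Dict Int Int × (PySem.Dict Int Int × Int)),
      (t ++ l).Nodup → pvInvB edges t s →
      pvInvB edges (t ++ l)
        (l.foldl
          (fun s node =>
            match s.2.1.get? (pvB_find (pvB_parent edges) ((pvB_nodes edges).length + 1) node) with
            | some i => (s.1.insert node i, s.2)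
            | none =>
                (s.1.insert node s.2.2,
                 (s.2.1.insert (pvB_find (pvB_parent edges) ((pvB_nodes edges).length + 1) node)
                    s.2.2,
                  s.2.2 + 1))) s) := by
  intro l
  induction l with
  | nil => intro t s _ h; simpa using h
  | cons m l ih =>
      intro t s hnd h
      have hm : m ∉ t := by
        rw [List.nodup_append] at hnd
        exact fun hc => hnd.2.2 m hc m List.mem_cons_self rfl
      have h1 := pvB_step edges t m hm s h
      have h2 := ih (t ++ [m]) _ (by rw [List.append_assoc]; simpa using hnd) h1
      rw [List.append_assoc] at h2
      simpa using h2

theorem pvB_ids_char (edges : List (Int × Int)) :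
    (∀ x : Int, (pvB_ids edges).get? x =
      if x ∈ pvB_nodes edges then
        (PySem.List.index? (pvFtab edges (pvB_nodes edges)) (pvFnd edges x)).map
          (fun n : Nat => (n : Int))
      else none) ∧
    (pvB_ids edges).keys = pvB_nodes edges := by
  have base : pvInvB edges [] (PySem.Dict.empty, (PySem.Dict.empty, 0)) := by
    refine ⟨?_, ?_, by simp [pvFtab], rfl⟩
    · intro x
      simp [PySem.Dict.get?_empty]
    · intro r
      rw [(PySem.List.index?_eq_none_iff _ _).mpr (by simp [pvFtab])]
      simp [PySem.Dict.get?_empty]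
  have hnd : (pvB_nodes edges).Nodup := by
    have hb : pvB_nodes edges = pvA_nodes edges := rfl
    rw [hb]
    exact pv_nodes_nodup edges
  have h := pvB_foldl edges (pvB_nodes edges) [] (PySem.Dict.empty, (PySem.Dict.empty, 0))
    (by simpa using hnd) base
  rw [List.nil_append] at h
  exact ⟨h.1, h.2.2.2⟩

-- ---- Phase 8: two maps inducing the same partition get the same first-seen numbering ----

theorem pv_ofList_filter (p : Int → Bool) :
    ∀ l : List Int, (PySem.Set.ofList l).filter p = PySem.Set.ofList (l.filter p) := by
  intro l
  induction l with
  | nil => rfl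
  | cons x l ih =>
      rw [PySem.Set.ofList_cons]
      have hdis : PySem.Set.discard (PySem.Set.ofList l) x
          = (PySem.Set.ofList l).filter (fun y => !(y == x)) := rfl
      by_cases hp : p x = true
      · rw [List.filter_cons_of_pos hp, hdis, List.filter_comm, ih]
        have hrhs : (x :: l).filter p = x :: l.filter p := List.filter_cons_of_pos hp
        rw [hrhs, PySem.Set.ofList_cons]
        rfl
      · have hp' : p x = false := by revert hp; cases p x <;> simp
        rw [List.filter_cons_of_neg (by simp [hp']), hdis, List.filter_comm, ih]
        have hrhs : (x :: l).filter p = l.filter p := List.filter_cons_of_neg (by simp [hp'])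
        rw [hrhs]
        apply List.filter_eq_self.mpr
        intro y hy
        have hymem : y ∈ l.filter p := (PySem.Set.mem_ofList _ _).mp hy
        have hyp : p y = true := (List.mem_filter.mp hymem).2
        have hyx : y ≠ x := by
          intro hc
          rw [hc] at hyp
          rw [hyp] at hp'
          cases hp'
        simp [hyx]

theorem pv_dedup_cons (a : Int) (l : List Int) :
    PySem.List.dedup (a :: l) = a :: PySem.List.dedup (l.filter (fun y => !(y == a))) := by
  rw [PySem.List.dedup_eq_ofList, PySem.List.dedup_eq_ofList, PySem.Set.ofList_cons]
  have hdis : PySem.Set.discard (PySem.Set.ofList l) a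
      = (PySem.Set.ofList l).filter (fun y => !(y == a)) := rfl
  rw [hdis, pv_ofList_filter]

theorem pv_idx_corr :
    ∀ (n : Nat) (L : List Int) (F G : Int → Int), L.length ≤ n →
      (∀ a ∈ L, ∀ b ∈ L, (F a = F b ↔ G a = G b)) → ∀ v ∈ L,
      PySem.List.index? (PySem.List.dedup (L.map F)) (F v) =
        PySem.List.index? (PySem.List.dedup (L.map G)) (G v) := by
  intro n
  induction n with
  | zero =>
      intro L F G hlen _ v hv
      rw [List.length_eq_zero_iff.mp (Nat.le_zero.mp hlen)] at hv
      cases hv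
  | succ n ih =>
      intro L F G hlen hcl v hv
      cases L with
      | nil => cases hv
      | cons x xs =>
          rw [List.map_cons, List.map_cons, pv_dedup_cons, pv_dedup_cons]
          have hvL : v ∈ x :: xs := hv
          have hxL : x ∈ x :: xs := List.mem_cons_self
          by_cases hfv : F v = F x
          · have hgv : G v = G x := (hcl v hvL x hxL).mp hfv
            rw [hfv, hgv, PySem.List.index?_cons_self, PySem.List.index?_cons_self]
          · have hgv : ¬ G v = G x := fun hc => hfv ((hcl v hvL x hxL).mpr hc)
            rw [PySem.List.index?_cons_of_ne _ (fun hc => hfv hc.symm),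
              PySem.List.index?_cons_of_ne _ (fun hc => hgv hc.symm)]
            have hfilF : (List.map F xs).filter (fun y => !(y == F x))
                = (xs.filter (fun y => !(F y == F x))).map F := by
              rw [List.filter_map]
              rfl
            have hfilG : (List.map G xs).filter (fun y => !(y == G x))
                = (xs.filter (fun y => !(G y == G x))).map G := by
              rw [List.filter_map]
              rfl
            have hsame : xs.filter (fun y => !(G y == G x)) =
                xs.filter (fun y => !(F y == F x)) := by
              apply List.filter_congr
              intro y hy
              have hiff := hcl y (List.mem_cons.mpr (Or.inr hy)) x hxL
              by_cases hFy : F y = F x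
              · simp [hFy, hiff.mp hFy]
              · have hGy : ¬ G y = G x := fun hc => hFy (hiff.mpr hc)
                simp [hFy, hGy]
            rw [hfilF, hfilG, hsame]
            have hvxs : v ∈ xs := by
              rcases List.mem_cons.mp hv with hc | hc
              · exact absurd (by rw [hc]) hfv
              · exact hc
            have hvfil : v ∈ xs.filter (fun y => !(F y == F x)) :=
              List.mem_filter.mpr ⟨hvxs, by simp [hfv]⟩
            have hlen' : (xs.filter (fun y => !(F y == F x))).length ≤ n := by
              have h1 := List.length_filter_le (fun y => !(F y == F x)) xs
              have h2 : (x :: xs).length = xs.length + 1 := rfl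
              omega
            have hcl' : ∀ a ∈ xs.filter (fun y => !(F y == F x)),
                ∀ b ∈ xs.filter (fun y => !(F y == F x)), (F a = F b ↔ G a = G b) := by
              intro a ha b hb
              exact hcl a (List.mem_cons.mpr (Or.inr (List.mem_filter.mp ha).1))
                b (List.mem_cons.mpr (Or.inr (List.mem_filter.mp hb).1))
            rw [ih _ F G hlen' hcl' v hvfil]

-- ---- Phase 9: assembling the two ports' outputs ----

theorem pv_main (edges : List (Int × Int))
    (pre1 : ∀ x ∈ pvNodes edges, 0 ≤ x ∧ x < ((pvNodes edges).length : Int))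
    (pre2 : ∀ x ∈ pvNodes edges, pvChainEnds edges (pvNodes edges).length x = true) :
    compress_unitigs edges = compress_unitigs_alt edges := by
  have hA := (pvA_assign_inv edges pre1 pre2).1
  have hB := (pvB_ids_char edges).1
  have hBkeys := (pvB_ids_char edges).2
  have hget : ∀ x : Int, (pvA_assign edges).1.get? x = (pvB_ids edges).get? x := by
    intro x
    rw [hA x, hB x]
    by_cases hx : x ∈ pvB_nodes edges
    · rw [if_pos hx]
      have hxA : x ∈ pvA_nodes edges := hx
      have hcl : ∀ a ∈ pvA_nodes edges, ∀ b ∈ pvA_nodes edges,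
          (pvFnd edges a = pvFnd edges b ↔ pvRoot edges a = pvRoot edges b) := by
        intro a ha b hb
        exact pv_find_iff edges pre1 pre2 ((pv_mem_nodes edges a).mp ha)
          ((pv_mem_nodes edges b).mp hb)
      have hcorr := pv_idx_corr (pvA_nodes edges).length (pvA_nodes edges)
        (pvFnd edges) (pvRoot edges) (le_refl _) hcl x hxA
      have hRt : pvRtab edges (pvA_nodes edges)
          = PySem.List.dedup ((pvA_nodes edges).map (pvRoot edges)) := rfl
      have hFt : pvFtab edges (pvB_nodes edges)
          = PySem.List.dedup ((pvA_nodes edges).map (pvFnd edges)) := rfl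
      rw [hRt, hFt, hcorr]
    · rw [if_neg hx]
      have hxN : x ∉ pvNodes edges := fun hc => hx ((pv_mem_nodes edges x).mpr hc)
      have hnr : pvRoot edges x ∉ pvRtab edges (pvA_nodes edges) := by
        unfold pvRtab
        rw [PySem.List.mem_dedup]
        intro hc
        exact hxN ((pv_root_mem_map_iff edges pre2 x).mp hc)
      rw [(PySem.List.index?_eq_none_iff _ _).mpr hnr]
      rfl
  have hgd : ∀ y : Int, (pvA_assign edges).1.getD y 0 = (pvB_ids edges).getD y 0 := by
    intro y
    rw [PySem.Dict.getD_eq_get?_getD, PySem.Dict.getD_eq_get?_getD, hget y]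
  have hsize : (pvA_assign edges).1.size = (pvB_ids edges).size := by
    rw [pvA_size edges pre1 pre2]
    have h1 : (pvB_ids edges).size = (pvB_ids edges).keys.length := by
      show (pvB_ids edges).items.length = ((pvB_ids edges).items.map (·.1)).length
      rw [List.length_map]
    rw [h1, hBkeys]
    have h2 : pvB_nodes edges = pvA_nodes edges := rfl
    rw [h2, pv_nodes_len edges pre1]
  show ((PySem.List.pyRange 0 ((pvA_assign edges).1.size : Int) 1).map
      (fun i => (pvA_assign edges).1.getD i 0),
    pvSetList (edges.foldl
      (fun s uv =>
        if (pvA_assign edges).1.getD uv.1 0 ≠ (pvA_assign edges).1.getD uv.2 0 then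
          pvSetAdd s ((pvA_assign edges).1.getD uv.1 0, (pvA_assign edges).1.getD uv.2 0)
        else s)
      pvSetEmpty)) =
    ((PySem.List.pyRange 0 ((pvB_ids edges).size : Int) 1).map
      (fun i => (pvB_ids edges).getD i 0),
    pvSetList (edges.foldl
      (fun s uv =>
        if (pvB_ids edges).getD uv.1 0 ≠ (pvB_ids edges).getD uv.2 0 then
          pvSetAdd s ((pvB_ids edges).getD uv.1 0, (pvB_ids edges).getD uv.2 0)
        else s)
      pvSetEmpty))
  have hfun1 : (fun i : Int => (pvA_assign edges).1.getD i 0)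
      = (fun i : Int => (pvB_ids edges).getD i 0) := funext hgd
  have hfun2 : (fun (s : List (Option (Int × (Int × Int))) × Nat) (uv : Int × Int) =>
      if (pvA_assign edges).1.getD uv.1 0 ≠ (pvA_assign edges).1.getD uv.2 0 then
        pvSetAdd s ((pvA_assign edges).1.getD uv.1 0, (pvA_assign edges).1.getD uv.2 0)
      else s) =
      (fun (s : List (Option (Int × (Int × Int))) × Nat) (uv : Int × Int) =>
      if (pvB_ids edges).getD uv.1 0 ≠ (pvB_ids edges).getD uv.2 0 then
        pvSetAdd s ((pvB_ids edges).getD uv.1 0, (pvB_ids edges).getD uv.2 0)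
      else s) := by
    funext s uv
    rw [hgd, hgd]
  rw [hsize, hfun1, hfun2]


-- ===== VERDICT (by name: the statement is the Claim_ definition above) =====
theorem compress_unitigs_spec : Claim_equal_compress_unitigs := by
  intro edges _ hpre
  obtain ⟨pre1, pre2⟩ := hpre
  show compress_unitigs edges = compress_unitigs_alt edges
  exact pv_main edges pre1 pre2
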